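-- pv_equiv track=rewrite | github.com/hogan-tech/leetcode-solution | 0043-4-2852-sum-of-remoteness-of-all-cells/0043-4-2852-sum-of-remoteness-of-all-cells.py | sumRemoteness
-- ===== SOURCE A (Python) =====
-- from collections import deque
-- from typing import List
--
-- def sumRemoteness(grid: List[List[int]]) -> int:
--     def bfs(grid, row, col, totalSum):
--         queue = deque()
--         currSum = grid[row][col]
--         currSize = 1
--         grid[row][col] = -1
--
--         queue.append((row, col))
--         while queue:
--             currR, currC = queue.popleft()
--             for dR, dC in [(0, 1), (1, 0), (-1, 0), (0, -1)]:
--                 nextR = currR + dR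
--                 nextC = currC + dC
--                 if 0 <= nextR < ROW and 0 <= nextC < COL and grid[nextR][nextC] > 0:
--                     queue.append((nextR, nextC))
--                     currSum += grid[nextR][nextC]
--                     currSize += 1
--                     grid[nextR][nextC] = -1
--
--         return (totalSum - currSum) * currSize
--
--     ROW = len(grid)
--     COL = len(grid[0])
--     totalSum = sum(val for row in grid for val in row if val != -1)
--     result = 0
--     for r in range(ROW):
--         for c in range(COL):
--             if grid[r][c] > 0:
--                 result += bfs(grid, r, c, totalSum)
--     return result
-- ===== SOURCE B (Python) =====
-- from typing import List
--
-- def sumRemoteness(grid: List[List[int]]) -> int: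
--     R = len(grid)
--     C = len(grid[0])
--     total = sum(val for row in grid for val in row if val != -1)
--     parent = list(range(R * C))
--
--     def find(i):
--         while parent[i] != i:
--             i = parent[i]
--         return i
--
--     for r in range(R):
--         for c in range(C):
--             if grid[r][c] > 0:
--                 i = r * C + c
--                 if c + 1 < C and grid[r][c + 1] > 0:
--                     pa, pb = find(i), find(i + 1)
--                     if pa < pb:
--                         parent[pb] = pa
--                     elif pb < pa:
--                         parent[pa] = pb
--                 if r + 1 < R and grid[r + 1][c] > 0:
--                     pa, pb = find(i), find(i + C)
--                     if pa < pb: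
--                         parent[pb] = pa
--                     elif pb < pa:
--                         parent[pa] = pb
--     sums = {}
--     sizes = {}
--     for r in range(R):
--         for c in range(C):
--             if grid[r][c] > 0:
--                 root = find(r * C + c)
--                 sums[root] = sums.get(root, 0) + grid[r][c]
--                 sizes[root] = sizes.get(root, 0) + 1
--     return sum((total - sums[k]) * sizes[k] for k in sums)
-- ===== Notes on version B (the rewrite author's own statement) =====
-- stated objective: alternative
-- what changed: The per-component BFS flood fill (queue, marking cells to -1) is replaced by a union-find: one pass unions each positive cell with its right and down positive neighbours (attaching the larger root under the smaller), a second pass accumulates per-root component sums and sizes in dictionaries, and the result is summed over the roots; B never mutates the grid.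
import Mathlib
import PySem

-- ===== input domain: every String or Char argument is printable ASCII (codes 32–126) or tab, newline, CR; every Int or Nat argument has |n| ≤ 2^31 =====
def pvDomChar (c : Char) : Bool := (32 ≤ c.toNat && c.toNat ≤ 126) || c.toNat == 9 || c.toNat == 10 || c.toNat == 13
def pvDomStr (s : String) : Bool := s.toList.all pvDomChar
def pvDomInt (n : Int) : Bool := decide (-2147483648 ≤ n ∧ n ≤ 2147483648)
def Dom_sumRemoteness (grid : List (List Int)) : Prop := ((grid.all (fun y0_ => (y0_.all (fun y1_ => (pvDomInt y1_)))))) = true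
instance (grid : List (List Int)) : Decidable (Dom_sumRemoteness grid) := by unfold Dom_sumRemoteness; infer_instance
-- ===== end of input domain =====

-- B replaces A's per-component BFS flood fill by a union-find: one pass unions each positive
-- cell with its right/down positive neighbours (larger root attached under smaller), a second
-- pass accumulates per-root component sums and sizes in dictionaries, and the result is summed
-- over the roots. A mutates `grid` in place (marks visited cells -1) while B never touches it;
-- the theorems below are about the return value.

-- ----- shared indexing helpers (Python grid[r][c] read/write, used under 0 ≤ index guards) -----
def pvCellGet (g : List (List Int)) (r c : Int) : Int := (g.getD r.toNat []).getD c.toNat 0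
def pvCellSet (g : List (List Int)) (r c : Int) (v : Int) : List (List Int) :=
  g.set r.toNat ((g.getD r.toNat []).set c.toNat v)
/-- number of cells with a positive value (termination measure of A's flood fill) -/
def pvCountPos (g : List (List Int)) : Nat :=
  (g.map (fun row => row.countP (fun v => decide (0 < v)))).sum

-- termination helper: marking a positive cell decreases the positive-cell count by one
theorem pvCountP_set_neg_one (l : List Int) (j : Nat) (hj : j < l.length) (h : 0 < l.getD j 0) :
    (l.set j (-1)).countP (fun v => decide (0 < v)) + 1 = l.countP (fun v => decide (0 < v)) := by
  induction l generalizing j with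
  | nil => simp at hj
  | cons x xs ih =>
    cases j with
    | zero => simp_all
    | succ j =>
      simp only [List.set_cons_succ, List.countP_cons]
      have := ih j (by simpa using hj) (by simpa using h)
      omega

theorem pvSum_map_set (g : List (List Int)) (i : Nat) (row : List Int)
    (f : List Int → Nat) (hi : i < g.length) :
    ((g.set i row).map f).sum + f (g.getD i []) = (g.map f).sum + f row := by
  induction g generalizing i with
  | nil => simp at hi
  | cons x xs ih =>
    cases i with
    | zero => simp; omega
    | succ i =>
      simp only [List.set_cons_succ, List.map_cons, List.sum_cons, List.getD_cons_succ]
      have := ih i (by simpa using hi)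
      omega

theorem pvCellGet_pos_bounds (g : List (List Int)) (r c : Int) (h : 0 < pvCellGet g r c) :
    r.toNat < g.length ∧ c.toNat < (g.getD r.toNat []).length := by
  constructor
  · by_contra hi
    rw [pvCellGet, List.getD_eq_default g [] (by omega)] at h
    simp at h
  · by_contra hj
    rw [pvCellGet, List.getD_eq_default _ 0 (by omega)] at h
    simp at h

theorem pvCountPos_mark (g : List (List Int)) (r c : Int) (h : 0 < pvCellGet g r c) :
    pvCountPos (pvCellSet g r c (-1)) + 1 = pvCountPos g := by
  obtain ⟨hi, hj⟩ := pvCellGet_pos_bounds g r c h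
  have h1 := pvCountP_set_neg_one (g.getD r.toNat []) c.toNat hj h
  have h2 := pvSum_map_set g r.toNat ((g.getD r.toNat []).set c.toNat (-1))
      (fun row => row.countP (fun v => decide (0 < v))) hi
  dsimp only at h2
  simp only [pvCountPos, pvCellSet]
  omega

-- ===== PORT A =====
def pvDirs : List (Int × Int) := [(0, 1), (1, 0), (-1, 0), (0, -1)]

/-- the `for dR, dC in [...]` body of A's BFS while-loop (queue is appended at the back) -/
def pvBfsNbrs (R C : Int) (ds : List (Int × Int)) (p : Int × Int) (g : List (List Int))
    (q : List (Int × Int)) (s n : Int) : List (List Int) × List (Int × Int) × Int × Int :=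
  match ds with
  | [] => (g, q, s, n)
  | d :: ds' =>
    let nr := p.1 + d.1
    let nc := p.2 + d.2
    if 0 ≤ nr ∧ nr < R ∧ 0 ≤ nc ∧ nc < C ∧ 0 < pvCellGet g nr nc then
      pvBfsNbrs R C ds' p (pvCellSet g nr nc (-1)) (q ++ [(nr, nc)]) (s + pvCellGet g nr nc) (n + 1)
    else
      pvBfsNbrs R C ds' p g q s n

theorem pvBfsNbrs_measure (R C : Int) (ds : List (Int × Int)) (p : Int × Int)
    (g : List (List Int)) (q : List (Int × Int)) (s n : Int) :
    5 * pvCountPos (pvBfsNbrs R C ds p g q s n).1 + (pvBfsNbrs R C ds p g q s n).2.1.length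
      ≤ 5 * pvCountPos g + q.length := by
  induction ds generalizing g q s n with
  | nil => simp [pvBfsNbrs]
  | cons d ds ih =>
    simp only [pvBfsNbrs]
    split
    · rename_i h
      have hc := pvCountPos_mark g (p.1 + d.1) (p.2 + d.2) h.2.2.2.2
      have := ih (pvCellSet g (p.1 + d.1) (p.2 + d.2) (-1)) (q ++ [(p.1 + d.1, p.2 + d.2)])
        (s + pvCellGet g (p.1 + d.1) (p.2 + d.2)) (n + 1)
      simp only [List.length_append, List.length_cons, List.length_nil] at this ⊢
      omega
    · exact ih g q s n

/-- A's `while queue:` loop -/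
def pvBfsLoop (R C : Int) (g : List (List Int)) (q : List (Int × Int)) (s n : Int) :
    Int × Int × List (List Int) :=
  match q with
  | [] => (s, n, g)
  | p :: rest =>
    let t := pvBfsNbrs R C pvDirs p g rest s n
    pvBfsLoop R C t.1 t.2.1 t.2.2.1 t.2.2.2
termination_by 5 * pvCountPos g + q.length
decreasing_by
  have := pvBfsNbrs_measure R C pvDirs p g rest s n
  simp only [List.length_cons]
  omega

/-- A's `bfs` helper: returns (its return value, the mutated grid) -/
def pvBfs (R C : Int) (g : List (List Int)) (row col tS : Int) : Int × List (List Int) :=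
  let currSum := pvCellGet g row col
  let g1 := pvCellSet g row col (-1)
  let t := pvBfsLoop R C g1 [(row, col)] currSum 1
  ((tS - t.1) * t.2.1, t.2.2)

def pvAInner (R C tS r : Int) (st : List (List Int) × Int) (c : Int) : List (List Int) × Int :=
  if 0 < pvCellGet st.1 r c then
    let t := pvBfs R C st.1 r c tS
    (t.2, st.2 + t.1)
  else st

def pvAOuter (R C tS : Int) (st : List (List Int) × Int) (r : Int) : List (List Int) × Int :=
  (PySem.List.pyRange 0 C 1).foldl (pvAInner R C tS r) st

def sumRemoteness (grid : List (List Int)) : Int :=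
  let R : Int := grid.length
  let C : Int := (grid.headD []).length
  let tS : Int := (grid.flatMap (fun row => row.filter (fun v => decide (v ≠ -1)))).sum
  ((PySem.List.pyRange 0 R 1).foldl (pvAOuter R C tS) (grid, 0)).2

-- ===== PORT B =====
/-- Source B's `find`: follow parents until the fixpoint.  The fuel argument (always called with
`par.length`, enough for every parent list B builds) only makes the Python `while` total. -/
def pvFind (par : List Nat) : Nat → Nat → Nat
  | 0, i => i
  | fuel + 1, i => if par.getD i i ≠ i then pvFind par fuel (par.getD i i) else i

/-- Source B's union body: find both roots, attach the larger root under the smaller -/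
def pvUnionEdge (par : List Nat) (i j : Nat) : List Nat :=
  let pa := pvFind par par.length i
  let pb := pvFind par par.length j
  if pa < pb then par.set pb pa
  else if pb < pa then par.set pa pb
  else par

/-- Source B's first-pass loop body for one cell: union with the right and down positive neighbours -/
def pvUnionCell (g : List (List Int)) (R C : Int) (r : Int) (par : List Nat) (c : Int) :
    List Nat :=
  if 0 < pvCellGet g r c then
    let i := (r * C + c).toNat
    let par1 := if c + 1 < C ∧ 0 < pvCellGet g r (c + 1) then pvUnionEdge par i (i + 1) else par
    if r + 1 < R ∧ 0 < pvCellGet g (r + 1) c then pvUnionEdge par1 i (i + C.toNat) else par1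
  else par

/-- Source B's second-pass loop body for one cell: accumulate the cell into its root's dict entries -/
def pvAccCell (g : List (List Int)) (C : Int) (par : List Nat) (r : Int)
    (st : PySem.Dict Nat Int × PySem.Dict Nat Int) (c : Int) :
    PySem.Dict Nat Int × PySem.Dict Nat Int :=
  if 0 < pvCellGet g r c then
    let root := pvFind par par.length (r * C + c).toNat
    (st.1.insert root (st.1.getD root 0 + pvCellGet g r c),
     st.2.insert root (st.2.getD root 0 + 1))
  else st

def sumRemoteness_alt (grid : List (List Int)) : Int :=
  let R : Int := grid.length
  let C : Int := (grid.headD []).length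
  let tS : Int := (grid.flatMap (fun row => row.filter (fun v => decide (v ≠ -1)))).sum
  let par0 : List Nat := List.range (grid.length * (grid.headD []).length)
  let par := (PySem.List.pyRange 0 R 1).foldl
      (fun p r => (PySem.List.pyRange 0 C 1).foldl (pvUnionCell grid R C r) p) par0
  let st := (PySem.List.pyRange 0 R 1).foldl
      (fun st r => (PySem.List.pyRange 0 C 1).foldl (pvAccCell grid C par r) st)
      (PySem.Dict.empty, PySem.Dict.empty)
  st.1.keys.foldl (fun a k => a + (tS - st.1.getD k 0) * st.2.getD k 0) 0

-- ===== PRECONDITION & SPEC =====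
-- Pre_ excludes exactly the inputs on which Python A raises IndexError: the empty grid
-- (grid[0]) and grids with a row shorter than the first row (the unconditional double loop
-- reads grid[r][c] for every c < len(grid[0])).
def Pre_sumRemoteness (grid : List (List Int)) : Prop :=
  grid ≠ [] ∧ ∀ row ∈ grid, (grid.headD []).length ≤ row.length
instance (grid : List (List Int)) : Decidable (Pre_sumRemoteness grid) := by
  unfold Pre_sumRemoteness; infer_instance

def pvWitness_sumRemoteness : List (List Int) := [[1, -1], [0, 2]]

def Spec_sumRemoteness (grid : List (List Int)) (out : Int) : Prop := out = sumRemoteness_alt grid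
instance (grid : List (List Int)) (out : Int) : Decidable (Spec_sumRemoteness grid out) := by
  unfold Spec_sumRemoteness; infer_instance

-- ===== CLAIM (what is proved, stated in full; the proofs are below) =====
def Claim_equal_sumRemoteness : Prop := ∀ (grid : List (List Int)), Dom_sumRemoteness grid →
  Pre_sumRemoteness grid → Spec_sumRemoteness grid (sumRemoteness grid)


-- ===== LEMMAS AND PROOFS =====

-- ---- cell-level helpers (shared by both sides of the proof) ----
def pvValid (R C : Int) (g : List (List Int)) (p : Int × Int) : Prop :=
  0 ≤ p.1 ∧ p.1 < R ∧ 0 ≤ p.2 ∧ p.2 < C ∧ 0 < pvCellGet g p.1 p.2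

def pvValidB (R C : Int) (g : List (List Int)) (p : Int × Int) : Bool :=
  decide (0 ≤ p.1) && decide (p.1 < R) && decide (0 ≤ p.2) && decide (p.2 < C) &&
    decide (0 < pvCellGet g p.1 p.2)

theorem pvValidB_iff (R C : Int) (g : List (List Int)) (p : Int × Int) :
    pvValidB R C g p = true ↔ pvValid R C g p := by
  simp [pvValidB, pvValid, and_assoc]

def pvMark (g : List (List Int)) (p : Int × Int) : List (List Int) := pvCellSet g p.1 p.2 (-1)

def pvVal (g : List (List Int)) (p : Int × Int) : Int := pvCellGet g p.1 p.2

-- ---- the row-major list of all grid coordinates ----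
def pvCells (R C : Int) : List (Int × Int) :=
  (PySem.List.pyRange 0 R 1).flatMap (fun r => (PySem.List.pyRange 0 C 1).map (fun c => (r, c)))

theorem pvMem_cells (R C : Int) (p : Int × Int) :
    p ∈ pvCells R C ↔ 0 ≤ p.1 ∧ p.1 < R ∧ 0 ≤ p.2 ∧ p.2 < C := by
  cases p with
  | mk a b =>
    simp only [pvCells, List.mem_flatMap, List.mem_map, PySem.List.mem_pyRange_one,
      Prod.mk.injEq]
    constructor
    · rintro ⟨r, hr, c, hc, rfl, rfl⟩
      exact ⟨hr.1, hr.2, hc.1, hc.2⟩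
    · rintro ⟨h1, h2, h3, h4⟩
      exact ⟨a, ⟨h1, h2⟩, b, ⟨h3, h4⟩, rfl, rfl⟩

def pvRm (C : Int) (p : Int × Int) : Int := p.1 * C + p.2

theorem pvRm_mono (C : Int) (p q : Int × Int) (hp2 : 0 ≤ p.2) (hpC : p.2 < C)
    (hq2 : 0 ≤ q.2) (h : p.1 < q.1) : pvRm C p < pvRm C q := by
  have h1 : (p.1 + 1) * C ≤ q.1 * C :=
    mul_le_mul_of_nonneg_right (by omega) (by omega)
  have h2 : (p.1 + 1) * C = p.1 * C + C := by ring
  simp only [pvRm]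
  omega

theorem pvCells_pairwise (R C : Int) :
    (pvCells R C).Pairwise (fun a b => pvRm C a < pvRm C b) := by
  apply List.pairwise_flatMap.mpr
  refine ⟨?_, ?_⟩
  · intro r _
    rw [List.pairwise_map]
    exact (PySem.List.pairwise_lt_pyRange_one 0 C).imp (fun {a b} h => by
      simp only [pvRm]; omega)
  · apply (PySem.List.pairwise_lt_pyRange_one 0 R).imp
    intro r r' h
    intro x hx y hy
    simp only [List.mem_map, PySem.List.mem_pyRange_one] at hx hy
    obtain ⟨c, hc, rfl⟩ := hx
    obtain ⟨c', hc', rfl⟩ := hy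
    exact pvRm_mono C (r, c) (r', c') hc.1 hc.2 hc'.1 h

-- ---- row-major index of a cell ----
def pvIdxC (C : Int) (p : Int × Int) : Nat := (p.1 * C + p.2).toNat

theorem pvRm_nonneg (C : Int) (p : Int × Int) (h1 : 0 ≤ p.1) (h2 : 0 ≤ p.2) (h3 : p.2 < C) :
    0 ≤ pvRm C p := by
  have : 0 ≤ p.1 * C := mul_nonneg h1 (by omega)
  simp only [pvRm]; omega

theorem pvRm_inj (C : Int) (p q : Int × Int)
    (hp : 0 ≤ p.1 ∧ 0 ≤ p.2 ∧ p.2 < C) (hq : 0 ≤ q.1 ∧ 0 ≤ q.2 ∧ q.2 < C)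
    (h : pvRm C p = pvRm C q) : p = q := by
  rcases lt_trichotomy p.1 q.1 with hlt | heq | hgt
  · exact absurd h (by have := pvRm_mono C p q hp.2.1 hp.2.2 hq.2.1 hlt; omega)
  · have : p.2 = q.2 := by simp only [pvRm, heq] at h; omega
    exact Prod.ext heq this
  · exact absurd h (by have := pvRm_mono C q p hq.2.1 hq.2.2 hp.2.1 hgt; omega)

theorem pvIdxC_eq_iff (C : Int) (p q : Int × Int)
    (hp : 0 ≤ p.1 ∧ 0 ≤ p.2 ∧ p.2 < C) (hq : 0 ≤ q.1 ∧ 0 ≤ q.2 ∧ q.2 < C) :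
    pvIdxC C p = pvIdxC C q ↔ p = q := by
  constructor
  · intro h
    have h1 := pvRm_nonneg C p hp.1 hp.2.1 hp.2.2
    have h2 := pvRm_nonneg C q hq.1 hq.2.1 hq.2.2
    refine pvRm_inj C p q hp hq ?_
    simp only [pvIdxC] at h
    rw [show p.1 * C + p.2 = pvRm C p from rfl, show q.1 * C + q.2 = pvRm C q from rfl] at h
    omega
  · intro h; rw [h]

theorem pvIdxC_le_iff (C : Int) (p q : Int × Int)
    (hp : 0 ≤ p.1 ∧ 0 ≤ p.2 ∧ p.2 < C) (hq : 0 ≤ q.1 ∧ 0 ≤ q.2 ∧ q.2 < C) :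
    pvIdxC C p ≤ pvIdxC C q ↔ pvRm C p ≤ pvRm C q := by
  have h1 := pvRm_nonneg C p hp.1 hp.2.1 hp.2.2
  have h2 := pvRm_nonneg C q hq.1 hq.2.1 hq.2.2
  simp only [pvIdxC]
  rw [show p.1 * C + p.2 = pvRm C p from rfl, show q.1 * C + q.2 = pvRm C q from rfl]
  omega

theorem pvIdxC_lt_N (R C : Int) (p : Int × Int)
    (hp : 0 ≤ p.1 ∧ p.1 < R ∧ 0 ≤ p.2 ∧ p.2 < C) :
    pvIdxC C p < R.toNat * C.toNat := by
  have h1 : p.1 * C + p.2 < R * C := by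
    have : (p.1 + 1) * C ≤ R * C := mul_le_mul_of_nonneg_right (by omega) (by omega)
    have : (p.1 + 1) * C = p.1 * C + C := by ring
    omega
  have h2 : 0 ≤ p.1 * C := mul_nonneg hp.1 (by omega)
  have h3 : (R.toNat : Int) * (C.toNat : Int) = R * C := by
    rw [Int.toNat_of_nonneg (by omega), Int.toNat_of_nonneg (by omega)]
  simp only [pvIdxC]
  omega

-- ---- adjacency of positive cells and its reflexive-transitive closure ----
def pvNbRt (p : Int × Int) : Int × Int := (p.1, p.2 + 1)
def pvNbDn (p : Int × Int) : Int × Int := (p.1 + 1, p.2)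

def pvAdj (R C : Int) (g : List (List Int)) (p q : Int × Int) : Prop :=
  pvValid R C g p ∧ pvValid R C g q ∧
    (q = pvNbRt p ∨ p = pvNbRt q ∨ q = pvNbDn p ∨ p = pvNbDn q)

def pvReach (R C : Int) (g : List (List Int)) (p q : Int × Int) : Prop :=
  Relation.ReflTransGen (pvAdj R C g) p q

theorem pvAdj_symm (R C : Int) (g : List (List Int)) {p q : Int × Int}
    (h : pvAdj R C g p q) : pvAdj R C g q p := by
  obtain ⟨h1, h2, h3⟩ := h
  exact ⟨h2, h1, by tauto⟩

theorem pvAdj_ne (R C : Int) (g : List (List Int)) {p q : Int × Int}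
    (h : pvAdj R C g p q) : q ≠ p := by
  obtain ⟨-, -, h3⟩ := h
  rcases h3 with h | h | h | h <;>
    (intro he; rw [he] at h; simp only [pvNbRt, pvNbDn, Prod.ext_iff] at h; omega)

theorem pvReach_symm (R C : Int) (g : List (List Int)) {p q : Int × Int}
    (h : pvReach R C g p q) : pvReach R C g q p := by
  induction h with
  | refl => exact Relation.ReflTransGen.refl
  | tail _ hstep ih =>
    exact Relation.ReflTransGen.trans (Relation.ReflTransGen.single (pvAdj_symm R C g hstep)) ih

theorem pvReach_valid (R C : Int) (g : List (List Int)) {p q : Int × Int}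
    (hp : pvValid R C g p) (h : pvReach R C g p q) : pvValid R C g q := by
  induction h with
  | refl => exact hp
  | tail _ hstep _ => exact hstep.2.1

theorem pvReach_trans (R C : Int) (g : List (List Int)) {p q x : Int × Int}
    (h1 : pvReach R C g p q) (h2 : pvReach R C g q x) : pvReach R C g p x :=
  Relation.ReflTransGen.trans h1 h2

-- ---- generic lemmas about reflexive-transitive closures ----
theorem pvRtg_congr {α : Type} {r r' : α → α → Prop} (h : ∀ x y, r x y ↔ r' x y)
    {p q : α} : Relation.ReflTransGen r p q ↔ Relation.ReflTransGen r' p q :=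
  ⟨Relation.ReflTransGen.mono (fun _ _ hxy => (h _ _).mp hxy),
   Relation.ReflTransGen.mono (fun _ _ hxy => (h _ _).mpr hxy)⟩

/-- adding one undirected edge (a, b) to a symmetric relation -/
theorem pvRtg_union_edge {α : Type} {r : α → α → Prop} (a b p q : α) :
    Relation.ReflTransGen (fun x y => r x y ∨ (x = a ∧ y = b) ∨ (x = b ∧ y = a)) p q ↔
      Relation.ReflTransGen r p q ∨
        (Relation.ReflTransGen r p a ∧ Relation.ReflTransGen r b q) ∨
        (Relation.ReflTransGen r p b ∧ Relation.ReflTransGen r a q) := by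
  constructor
  · intro h
    induction h with
    | refl => exact Or.inl .refl
    | tail _ hstep ih =>
      rename_i c q _
      rcases hstep with hr | ⟨rfl, rfl⟩ | ⟨rfl, rfl⟩
      · rcases ih with h1 | ⟨h1, h2⟩ | ⟨h1, h2⟩
        · exact Or.inl (h1.tail hr)
        · exact Or.inr (Or.inl ⟨h1, h2.tail hr⟩)
        · exact Or.inr (Or.inr ⟨h1, h2.tail hr⟩)
      · rcases ih with h1 | ⟨h1, h2⟩ | ⟨h1, h2⟩
        · exact Or.inr (Or.inl ⟨h1, .refl⟩)
        · exact Or.inr (Or.inl ⟨h1, .refl⟩)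
        · exact Or.inl h1
      · rcases ih with h1 | ⟨h1, h2⟩ | ⟨h1, h2⟩
        · exact Or.inr (Or.inr ⟨h1, .refl⟩)
        · exact Or.inl h1
        · exact Or.inr (Or.inr ⟨h1, .refl⟩)
  · have hmono : ∀ {x y : α}, Relation.ReflTransGen r x y →
        Relation.ReflTransGen (fun x y => r x y ∨ (x = a ∧ y = b) ∨ (x = b ∧ y = a)) x y :=
      fun h => h.mono (fun _ _ hxy => Or.inl hxy)
    rintro (h | ⟨h1, h2⟩ | ⟨h1, h2⟩)
    · exact hmono h
    · exact ((hmono h1).tail (Or.inr (Or.inl ⟨rfl, rfl⟩))).trans (hmono h2)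
    · exact ((hmono h1).tail (Or.inr (Or.inr ⟨rfl, rfl⟩))).trans (hmono h2)

/-- a path may be rerouted to avoid a vertex, or else that vertex is reachable -/
theorem pvRtg_avoid_or {α : Type} {r : α → α → Prop} (p x q : α)
    (h : Relation.ReflTransGen r x q) :
    Relation.ReflTransGen (fun a b => r a b ∧ b ≠ p) x q ∨ Relation.ReflTransGen r p q := by
  induction h with
  | refl => exact Or.inl .refl
  | tail _ hstep ih =>
    rename_i c q _
    by_cases hq : q = p
    · exact Or.inr (hq ▸ Relation.ReflTransGen.refl)
    · rcases ih with h1 | h1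
      · exact Or.inl (h1.tail ⟨hstep, hq⟩)
      · exact Or.inr (h1.tail hstep)

/-- a nontrivial path from p decomposes into a first step and a p-avoiding rest -/
theorem pvRtg_start_avoid {α : Type} {r : α → α → Prop} (p q : α)
    (h : Relation.ReflTransGen r p q) (hne : q ≠ p) :
    ∃ x, r p x ∧ Relation.ReflTransGen (fun a b => r a b ∧ b ≠ p) x q := by
  induction h with
  | refl => exact absurd rfl hne
  | tail _ hstep ih =>
    rename_i c q _
    by_cases hc : c = p
    · subst hc
      exact ⟨q, hstep, .refl⟩
    · obtain ⟨x, h1, h2⟩ := ih hc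
      by_cases hq : q = p
      · exact absurd hq hne
      · exact ⟨x, h1, h2.tail ⟨hstep, hq⟩⟩
-- ---- union-find: the abstract root function and its update laws ----
/-- abstract root: follow parents while they strictly decrease (Source B's trees always do) -/
def pvRootF (par : List Nat) (k : Nat) : Nat :=
  if h : par.getD k k < k then pvRootF par (par.getD k k) else k
termination_by k
decreasing_by exact h

def pvMono (par : List Nat) : Prop := ∀ i, par.getD i i ≤ i

theorem pvRootF_le (par : List Nat) (k : Nat) : pvRootF par k ≤ k := by
  rw [pvRootF]
  split
  · rename_i h
    exact le_trans (pvRootF_le par _) (le_of_lt h)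
  · exact le_refl k
termination_by k
decreasing_by rename_i h; exact h

theorem pvRootF_parent_self (par : List Nat) (hm : pvMono par) (k : Nat) :
    par.getD (pvRootF par k) (pvRootF par k) = pvRootF par k := by
  rw [pvRootF]
  split
  · rename_i h
    exact pvRootF_parent_self par hm _
  · rename_i h
    have := hm k
    omega
termination_by k
decreasing_by rename_i h; exact h

theorem pvRootF_fix (par : List Nat) (k : Nat) (h : par.getD k k = k) :
    pvRootF par k = k := by
  rw [pvRootF]
  split
  · rename_i h2; omega
  · rfl

theorem pvRootF_step (par : List Nat) (k : Nat) (h : par.getD k k < k) :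
    pvRootF par k = pvRootF par (par.getD k k) := by
  rw [pvRootF, dif_pos h]

theorem pvGetD_set (par : List Nat) (x y i : Nat) :
    (par.set x y).getD i i = if x = i ∧ x < par.length then y else par.getD i i := by
  by_cases h : x = i ∧ x < par.length
  · obtain ⟨rfl, hl⟩ := h
    rw [if_pos ⟨rfl, hl⟩, List.getD_eq_getElem?_getD, List.getElem?_set_self hl]
    rfl
  · rw [if_neg h]
    by_cases hil : i < par.length
    · by_cases hxi : x = i
      · subst hxi
        exact absurd ⟨rfl, hil⟩ h
      · rw [List.getD_eq_getElem?_getD, List.getElem?_set_ne (by omega),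
          ← List.getD_eq_getElem?_getD]
    · rw [List.getD_eq_default _ _ (by simpa using hil),
        List.getD_eq_default _ _ (by omega)]

/-- Source B's `find` with fuel computes the abstract root (fuel `par.length` always suffices) -/
theorem pvFind_eq_rootF (par : List Nat) (hm : pvMono par) :
    ∀ (fuel i : Nat), i < fuel ∨ par.length ≤ i → pvFind par fuel i = pvRootF par i := by
  intro fuel
  induction fuel with
  | zero =>
    intro i hi
    have hlen : par.length ≤ i := by omega
    have h0 : par.getD i i = i := by
      rw [List.getD_eq_default]; omega
    have h1 : pvFind par 0 i = i := rfl
    rw [h1, pvRootF_fix par i h0]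
  | succ f ih =>
    intro i hi
    rw [pvFind]
    by_cases hne : par.getD i i ≠ i
    · rw [if_pos hne]
      have hle := hm i
      have hlt : par.getD i i < i := by omega
      have hil : i < par.length := by
        by_contra hc
        rw [List.getD_eq_default _ _ (by omega)] at hne
        exact hne rfl
      rw [ih (par.getD i i) (by omega), pvRootF_step par i hlt]
    · rw [if_neg hne]
      have hne' : par.getD i i = i := by omega
      rw [pvRootF_fix par i hne']

theorem pvFind_len_eq_rootF (par : List Nat) (hm : pvMono par) (i : Nat) :
    pvFind par par.length i = pvRootF par i := by
  rcases lt_or_ge i par.length with h | h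
  · exact pvFind_eq_rootF par hm par.length i (Or.inl h)
  · exact pvFind_eq_rootF par hm par.length i (Or.inr h)

theorem pvMono_set (par : List Nat) (hm : pvMono par) (x y : Nat) (hyx : y < x) :
    pvMono (par.set x y) := by
  intro i
  rw [pvGetD_set]
  split
  · rename_i h; omega
  · exact hm i

/-- the root function after pointing root x at root y -/
theorem pvRootF_set (par : List Nat) (hm : pvMono par) (x y : Nat)
    (hx : par.getD x x = x) (hy : par.getD y y = y) (hyx : y < x) (hxl : x < par.length) :
    ∀ k, pvRootF (par.set x y) k = if pvRootF par k = x then y else pvRootF par k := by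
  intro k
  induction k using Nat.strong_induction_on with
  | _ k ih =>
    by_cases hkx : k = x
    · have hget : (par.set x y).getD k k = y := by
        rw [pvGetD_set, if_pos ⟨hkx.symm, hxl⟩]
      rw [pvRootF_step _ k (by rw [hget]; omega), hget, ih y (by omega),
        pvRootF_fix par y hy, if_neg (by omega : ¬ y = x), hkx,
        pvRootF_fix par x hx, if_pos rfl]
    · have hget : (par.set x y).getD k k = par.getD k k := by
        rw [pvGetD_set, if_neg (by intro hc; exact hkx hc.1.symm)]
      by_cases hlt : par.getD k k < k
      · rw [pvRootF_step _ k (by rw [hget]; omega), hget, ih _ hlt,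
          pvRootF_step par k hlt]
      · have heq : par.getD k k = k := by have := hm k; omega
        rw [pvRootF_fix _ k (by rw [hget]; exact heq), pvRootF_fix par k heq,
          if_neg hkx]
-- ---- the union-find invariant over an edge relation E ----
theorem pvRtg_symm {α : Type} {r : α → α → Prop} (hsym : ∀ x y, r x y → r y x)
    {p q : α} (h : Relation.ReflTransGen r p q) : Relation.ReflTransGen r q p := by
  induction h with
  | refl => exact .refl
  | tail _ hstep ih => exact .trans (.single (hsym _ _ hstep)) ih

theorem pvRtg_false {α : Type} {p q : α}
    (h : Relation.ReflTransGen (fun _ _ => False) p q) : p = q := by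
  induction h with
  | refl => rfl
  | tail _ hstep _ => exact absurd hstep (by simp)

structure pvInvE (R C : Int) (g : List (List Int))
    (E : (Int × Int) → (Int × Int) → Prop) (par : List Nat) : Prop where
  len : par.length = R.toNat * C.toNat
  mono : pvMono par
  root_eq : ∀ p q, pvValid R C g p → pvValid R C g q →
    (pvRootF par (pvIdxC C p) = pvRootF par (pvIdxC C q) ↔ Relation.ReflTransGen E p q)
  root_min : ∀ p, pvValid R C g p → ∃ w, pvValid R C g w ∧ Relation.ReflTransGen E p w ∧
    pvRootF par (pvIdxC C p) = pvIdxC C w ∧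
    ∀ x, pvValid R C g x → Relation.ReflTransGen E p x → pvIdxC C w ≤ pvIdxC C x

theorem pvInvE_congr {R C : Int} {g : List (List Int)}
    {E E' : (Int × Int) → (Int × Int) → Prop} {par : List Nat}
    (h : ∀ x y, E x y ↔ E' x y) (inv : pvInvE R C g E par) : pvInvE R C g E' par := by
  refine ⟨inv.len, inv.mono, ?_, ?_⟩
  · intro p q hp hq
    rw [inv.root_eq p q hp hq]
    exact pvRtg_congr h
  · intro p hp
    obtain ⟨w, h1, h2, h3, h4⟩ := inv.root_min p hp
    exact ⟨w, h1, (pvRtg_congr h).mp h2, h3,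
      fun x hx hr => h4 x hx ((pvRtg_congr h).mpr hr)⟩

theorem pvInvE_init (R C : Int) (g : List (List Int)) :
    pvInvE R C g (fun _ _ => False) (List.range (R.toNat * C.toNat)) := by
  have hmono : pvMono (List.range (R.toNat * C.toNat)) := by
    intro i
    by_cases h : i < R.toNat * C.toNat
    · rw [List.getD_eq_getElem?_getD, List.getElem?_range h]; rfl
    · rw [List.getD_eq_default _ _ (by simpa using h)]
  have hroot : ∀ k, pvRootF (List.range (R.toNat * C.toNat)) k = k := by
    intro k
    apply pvRootF_fix
    by_cases h : k < R.toNat * C.toNat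
    · rw [List.getD_eq_getElem?_getD, List.getElem?_range h]; rfl
    · rw [List.getD_eq_default _ _ (by simpa using h)]
  refine ⟨List.length_range, hmono, ?_, ?_⟩
  · intro p q hp hq
    rw [hroot, hroot]
    constructor
    · intro h
      have : p = q := by
        refine pvRm_inj C p q ⟨hp.1, hp.2.2.1, hp.2.2.2.1⟩ ⟨hq.1, hq.2.2.1, hq.2.2.2.1⟩ ?_
        exact (pvIdxC_eq_iff C p q ⟨hp.1, hp.2.2.1, hp.2.2.2.1⟩
          ⟨hq.1, hq.2.2.1, hq.2.2.2.1⟩).mp h ▸ rfl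
      exact this ▸ Relation.ReflTransGen.refl
    · intro h
      rw [pvRtg_false h]
  · intro p hp
    exact ⟨p, hp, .refl, hroot _, fun x hx hr => by rw [pvRtg_false hr]⟩

-- the merge case: the two roots differ and the larger is pointed at the smaller
theorem pvInvE_union_lt (R C : Int) (g : List (List Int))
    (E : (Int × Int) → (Int × Int) → Prop) (par : List Nat)
    (inv : pvInvE R C g E par) (hEsym : ∀ x y, E x y → E y x) (a b : Int × Int)
    (hva : pvValid R C g a) (hvb : pvValid R C g b)
    (hlt : pvRootF par (pvIdxC C a) < pvRootF par (pvIdxC C b)) :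
    pvInvE R C g (fun x y => E x y ∨ (x = a ∧ y = b) ∨ (x = b ∧ y = a))
      (par.set (pvRootF par (pvIdxC C b)) (pvRootF par (pvIdxC C a))) := by
  have hca : 0 ≤ a.1 ∧ 0 ≤ a.2 ∧ a.2 < C := ⟨hva.1, hva.2.2.1, hva.2.2.2.1⟩
  have hcb : 0 ≤ b.1 ∧ 0 ≤ b.2 ∧ b.2 < C := ⟨hvb.1, hvb.2.2.1, hvb.2.2.2.1⟩
  set ri := pvRootF par (pvIdxC C a) with hri
  set rj := pvRootF par (pvIdxC C b) with hrj
  have hxl : rj < par.length := by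
    rw [inv.len]
    exact lt_of_le_of_lt (pvRootF_le par _)
      (pvIdxC_lt_N R C b ⟨hvb.1, hvb.2.1, hvb.2.2.1, hvb.2.2.2.1⟩)
  have hrootset := pvRootF_set par inv.mono rj ri
    (pvRootF_parent_self par inv.mono _) (pvRootF_parent_self par inv.mono _) hlt hxl
  have hmono' := pvMono_set par inv.mono rj ri hlt
  have hAiff : ∀ p, pvValid R C g p →
      (pvRootF par (pvIdxC C p) = ri ↔ Relation.ReflTransGen E p a) := by
    intro p hp
    rw [← inv.root_eq p a hp hva]
  have hBiff : ∀ p, pvValid R C g p →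
      (pvRootF par (pvIdxC C p) = rj ↔ Relation.ReflTransGen E p b) := by
    intro p hp
    rw [← inv.root_eq p b hp hvb]
  refine ⟨by rw [List.length_set]; exact inv.len, hmono', ?_, ?_⟩
  · intro p q hp hq
    rw [hrootset, hrootset, pvRtg_union_edge]
    by_cases hpb : pvRootF par (pvIdxC C p) = rj <;>
      by_cases hqb : pvRootF par (pvIdxC C q) = rj
    · rw [if_pos hpb, if_pos hqb]
      simp only [true_iff]
      exact Or.inl (((hBiff p hp).mp hpb).trans
        (pvRtg_symm hEsym ((hBiff q hq).mp hqb)))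
    · rw [if_pos hpb, if_neg hqb]
      constructor
      · intro h
        exact Or.inr (Or.inr ⟨(hBiff p hp).mp hpb,
          pvRtg_symm hEsym ((hAiff q hq).mp h.symm)⟩)
      · rintro (h | ⟨h1, h2⟩ | ⟨h1, h2⟩)
        · exact absurd ((inv.root_eq p q hp hq).mpr h ▸ hpb) hqb
        · exact absurd ((hBiff q hq).mpr (pvRtg_symm hEsym h2)) hqb
        · exact ((hAiff q hq).mpr (pvRtg_symm hEsym h2)).symm
    · rw [if_neg hpb, if_pos hqb]
      constructor
      · intro h
        exact Or.inr (Or.inl ⟨(hAiff p hp).mp h, pvRtg_symm hEsym ((hBiff q hq).mp hqb)⟩)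
      · rintro (h | ⟨h1, h2⟩ | ⟨h1, h2⟩)
        · exact absurd (((inv.root_eq p q hp hq).mpr h).symm ▸ hqb) hpb
        · exact (hAiff p hp).mpr h1
        · exact absurd ((hBiff p hp).mpr h1) hpb
    · rw [if_neg hpb, if_neg hqb]
      rw [inv.root_eq p q hp hq]
      constructor
      · exact Or.inl
      · rintro (h | ⟨h1, h2⟩ | ⟨h1, h2⟩)
        · exact h
        · exact absurd ((hBiff q hq).mpr (pvRtg_symm hEsym h2)) hqb
        · exact absurd ((hBiff p hp).mpr h1) hpb
  · intro p hp
    obtain ⟨wa, ha1, ha2, ha3, ha4⟩ := inv.root_min a hva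
    obtain ⟨wb, hb1, hb2, hb3, hb4⟩ := inv.root_min b hvb
    have hwa : pvIdxC C wa = ri := by rw [← ha3]
    have hwb : pvIdxC C wb = rj := by rw [← hb3]
    have hmor : ∀ {x y : Int × Int}, Relation.ReflTransGen E x y →
        Relation.ReflTransGen (fun x y => E x y ∨ (x = a ∧ y = b) ∨ (x = b ∧ y = a)) x y :=
      fun h => h.mono (fun _ _ hxy => Or.inl hxy)
    by_cases hmerged : pvRootF par (pvIdxC C p) = ri ∨ pvRootF par (pvIdxC C p) = rj
    · refine ⟨wa, ha1, ?_, ?_, ?_⟩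
      · rcases hmerged with h | h
        · exact (hmor ((hAiff p hp).mp h)).trans (hmor ha2)
        · exact (((hmor ((hBiff p hp).mp h)).tail
            (Or.inr (Or.inr ⟨rfl, rfl⟩))).trans (hmor ha2))
      · rw [hrootset]
        rcases hmerged with h | h
        · rw [if_neg (by omega), h, hwa]
        · rw [if_pos h, hwa]
      · intro x hx hr
        rw [pvRtg_union_edge] at hr
        have hax : Relation.ReflTransGen E a x → pvIdxC C wa ≤ pvIdxC C x :=
          fun h => ha4 x hx h
        have hbx : Relation.ReflTransGen E b x → pvIdxC C wa ≤ pvIdxC C x := by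
          intro h
          have := hb4 x hx h
          omega
        rcases hr with h | ⟨h1, h2⟩ | ⟨h1, h2⟩
        · rcases hmerged with hm | hm
          · exact hax (pvRtg_symm hEsym ((hAiff p hp).mp hm) |>.trans h)
          · exact hbx (pvRtg_symm hEsym ((hBiff p hp).mp hm) |>.trans h)
        · exact hbx h2
        · exact hax h2
    · push_neg at hmerged
      obtain ⟨wp, hp1, hp2, hp3, hp4⟩ := inv.root_min p hp
      refine ⟨wp, hp1, hmor hp2, ?_, ?_⟩
      · rw [hrootset, if_neg hmerged.2, hp3]
      · intro x hx hr
        rw [pvRtg_union_edge] at hr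
        rcases hr with h | ⟨h1, h2⟩ | ⟨h1, h2⟩
        · exact hp4 x hx h
        · exact absurd ((hAiff p hp).mpr h1) hmerged.1
        · exact absurd ((hBiff p hp).mpr h1) hmerged.2

-- the no-op case: the two cells are already in the same class
theorem pvInvE_union_eq (R C : Int) (g : List (List Int))
    (E : (Int × Int) → (Int × Int) → Prop) (par : List Nat)
    (inv : pvInvE R C g E par) (hEsym : ∀ x y, E x y → E y x) (a b : Int × Int)
    (hva : pvValid R C g a) (hvb : pvValid R C g b)
    (heq : pvRootF par (pvIdxC C a) = pvRootF par (pvIdxC C b)) :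
    pvInvE R C g (fun x y => E x y ∨ (x = a ∧ y = b) ∨ (x = b ∧ y = a)) par := by
  have hab : Relation.ReflTransGen E a b := (inv.root_eq a b hva hvb).mp heq
  have hcoll : ∀ p q, Relation.ReflTransGen
      (fun x y => E x y ∨ (x = a ∧ y = b) ∨ (x = b ∧ y = a)) p q ↔
      Relation.ReflTransGen E p q := by
    intro p q
    rw [pvRtg_union_edge]
    constructor
    · rintro (h | ⟨h1, h2⟩ | ⟨h1, h2⟩)
      · exact h
      · exact (h1.trans hab).trans h2
      · exact (h1.trans (pvRtg_symm hEsym hab)).trans h2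
    · exact Or.inl
  refine ⟨inv.len, inv.mono, ?_, ?_⟩
  · intro p q hp hq
    rw [hcoll, inv.root_eq p q hp hq]
  · intro p hp
    obtain ⟨w, h1, h2, h3, h4⟩ := inv.root_min p hp
    exact ⟨w, h1, h2.mono (fun _ _ hxy => Or.inl hxy), h3,
      fun x hx hr => h4 x hx ((hcoll p x).mp hr)⟩
-- ---- the edge set processed after a prefix of cells, and the union pass ----
def pvEAdj (R C : Int) (g : List (List Int)) (Pref : List (Int × Int))
    (x y : Int × Int) : Prop :=
  pvValid R C g x ∧ pvValid R C g y ∧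
    ((y = pvNbRt x ∧ x ∈ Pref) ∨ (x = pvNbRt y ∧ y ∈ Pref) ∨
     (y = pvNbDn x ∧ x ∈ Pref) ∨ (x = pvNbDn y ∧ y ∈ Pref))

theorem pvEAdj_symm (R C : Int) (g : List (List Int)) (Pref : List (Int × Int)) :
    ∀ x y, pvEAdj R C g Pref x y → pvEAdj R C g Pref y x := by
  intro x y ⟨h1, h2, h3⟩
  exact ⟨h2, h1, by tauto⟩

theorem pvEAdj_nil (R C : Int) (g : List (List Int)) (x y : Int × Int) :
    pvEAdj R C g [] x y ↔ False := by
  simp [pvEAdj]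

theorem pvEAdj_cells (R C : Int) (g : List (List Int)) (x y : Int × Int) :
    pvEAdj R C g (pvCells R C) x y ↔ pvAdj R C g x y := by
  constructor
  · rintro ⟨h1, h2, h3⟩
    exact ⟨h1, h2, by tauto⟩
  · rintro ⟨h1, h2, h3⟩
    have hx : x ∈ pvCells R C := (pvMem_cells R C x).mpr ⟨h1.1, h1.2.1, h1.2.2.1, h1.2.2.2.1⟩
    have hy : y ∈ pvCells R C := (pvMem_cells R C y).mpr ⟨h2.1, h2.2.1, h2.2.2.1, h2.2.2.2.1⟩
    exact ⟨h1, h2, by tauto⟩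

theorem pvEAdj_append (R C : Int) (g : List (List Int)) (Pref : List (Int × Int))
    (p : Int × Int) (hvp : pvValid R C g p) (x y : Int × Int) :
    pvEAdj R C g (Pref ++ [p]) x y ↔
      (pvEAdj R C g Pref x y ∨
        (pvValid R C g (pvNbRt p) ∧ ((x = p ∧ y = pvNbRt p) ∨ (x = pvNbRt p ∧ y = p))) ∨
        (pvValid R C g (pvNbDn p) ∧ ((x = p ∧ y = pvNbDn p) ∨ (x = pvNbDn p ∧ y = p)))) := by
  constructor
  · rintro ⟨h1, h2, h3⟩
    simp only [List.mem_append, List.mem_singleton] at h3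
    rcases h3 with ⟨hy, hx | rfl⟩ | ⟨hx, hy | rfl⟩ | ⟨hy, hx | rfl⟩ | ⟨hx, hy | rfl⟩
    · exact Or.inl ⟨h1, h2, Or.inl ⟨hy, hx⟩⟩
    · exact Or.inr (Or.inl ⟨hy ▸ h2, Or.inl ⟨rfl, hy⟩⟩)
    · exact Or.inl ⟨h1, h2, Or.inr (Or.inl ⟨hx, hy⟩)⟩
    · exact Or.inr (Or.inl ⟨hx ▸ h1, Or.inr ⟨hx, rfl⟩⟩)
    · exact Or.inl ⟨h1, h2, Or.inr (Or.inr (Or.inl ⟨hy, hx⟩))⟩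
    · exact Or.inr (Or.inr ⟨hy ▸ h2, Or.inl ⟨rfl, hy⟩⟩)
    · exact Or.inl ⟨h1, h2, Or.inr (Or.inr (Or.inr ⟨hx, hy⟩))⟩
    · exact Or.inr (Or.inr ⟨hx ▸ h1, Or.inr ⟨hx, rfl⟩⟩)
  · rintro (⟨h1, h2, h3⟩ | ⟨hv, ⟨rfl, rfl⟩ | ⟨rfl, rfl⟩⟩ | ⟨hv, ⟨rfl, rfl⟩ | ⟨rfl, rfl⟩⟩)
    · exact ⟨h1, h2, by simp only [List.mem_append]; tauto⟩
    · exact ⟨hvp, hv, Or.inl ⟨rfl, by simp⟩⟩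
    · exact ⟨hv, hvp, Or.inr (Or.inl ⟨rfl, by simp⟩)⟩
    · exact ⟨hvp, hv, Or.inr (Or.inr (Or.inl ⟨rfl, by simp⟩))⟩
    · exact ⟨hv, hvp, Or.inr (Or.inr (Or.inr ⟨rfl, by simp⟩))⟩

/-- one union of Source B preserves the invariant, adding the corresponding edge -/
theorem pvUnionEdge_invE (R C : Int) (g : List (List Int))
    (E : (Int × Int) → (Int × Int) → Prop) (par : List Nat)
    (inv : pvInvE R C g E par) (hEsym : ∀ x y, E x y → E y x) (a b : Int × Int)
    (hva : pvValid R C g a) (hvb : pvValid R C g b) :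
    pvInvE R C g (fun x y => E x y ∨ (x = a ∧ y = b) ∨ (x = b ∧ y = a))
      (pvUnionEdge par (pvIdxC C a) (pvIdxC C b)) := by
  have hfind : ∀ i, pvFind par par.length i = pvRootF par i := pvFind_len_eq_rootF par inv.mono
  rcases lt_trichotomy (pvRootF par (pvIdxC C a)) (pvRootF par (pvIdxC C b))
    with hlt | heq | hgt
  · have : pvUnionEdge par (pvIdxC C a) (pvIdxC C b)
        = par.set (pvRootF par (pvIdxC C b)) (pvRootF par (pvIdxC C a)) := by
      rw [pvUnionEdge]
      simp only [hfind]
      rw [if_pos hlt]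
    rw [this]
    exact pvInvE_union_lt R C g E par inv hEsym a b hva hvb hlt
  · have : pvUnionEdge par (pvIdxC C a) (pvIdxC C b) = par := by
      rw [pvUnionEdge]
      simp only [hfind]
      rw [if_neg (by omega), if_neg (by omega)]
    rw [this]
    exact pvInvE_union_eq R C g E par inv hEsym a b hva hvb heq
  · have : pvUnionEdge par (pvIdxC C a) (pvIdxC C b)
        = par.set (pvRootF par (pvIdxC C a)) (pvRootF par (pvIdxC C b)) := by
      rw [pvUnionEdge]
      simp only [hfind]
      rw [if_neg (by omega), if_pos hgt]
    rw [this]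
    exact pvInvE_congr (by intro x y; tauto)
      (pvInvE_union_lt R C g E par inv hEsym b a hvb hva hgt)

theorem pvIdxC_nbRt (C : Int) (p : Int × Int)
    (h : 0 ≤ p.1 ∧ 0 ≤ p.2 ∧ p.2 < C) : pvIdxC C (pvNbRt p) = pvIdxC C p + 1 := by
  have h0 := pvRm_nonneg C p h.1 h.2.1 h.2.2
  simp only [pvIdxC, pvNbRt, pvRm] at *
  omega

theorem pvIdxC_nbDn (C : Int) (p : Int × Int)
    (h : 0 ≤ p.1 ∧ 0 ≤ p.2 ∧ p.2 < C) : pvIdxC C (pvNbDn p) = pvIdxC C p + C.toNat := by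
  have h0 := pvRm_nonneg C p h.1 h.2.1 h.2.2
  have h1 : (p.1 + 1) * C + p.2 = p.1 * C + p.2 + C := by ring
  simp only [pvIdxC, pvNbDn, pvRm] at *
  omega

/-- unfolding Source B's per-cell union body -/
theorem pvUnionCell_eq (g : List (List Int)) (R C r : Int) (par : List Nat) (c : Int) :
    pvUnionCell g R C r par c =
      if 0 < pvCellGet g r c then
        (if r + 1 < R ∧ 0 < pvCellGet g (r + 1) c then
          pvUnionEdge
            (if c + 1 < C ∧ 0 < pvCellGet g r (c + 1) then
              pvUnionEdge par ((r * C + c).toNat) ((r * C + c).toNat + 1)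
            else par)
            ((r * C + c).toNat) ((r * C + c).toNat + C.toNat)
        else
          (if c + 1 < C ∧ 0 < pvCellGet g r (c + 1) then
            pvUnionEdge par ((r * C + c).toNat) ((r * C + c).toNat + 1)
          else par))
      else par := rfl

/-- processing one cell of Source B's first pass -/
theorem pvUnionCell_invE (R C : Int) (g : List (List Int)) (Pref : List (Int × Int))
    (par : List Nat) (p : Int × Int) (hp : p ∈ pvCells R C)
    (inv : pvInvE R C g (pvEAdj R C g Pref) par) :
    pvInvE R C g (pvEAdj R C g (Pref ++ [p])) (pvUnionCell g R C p.1 par p.2) := by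
  obtain ⟨hb1, hb2, hb3, hb4⟩ := (pvMem_cells R C p).mp hp
  by_cases hpos : 0 < pvCellGet g p.1 p.2
  case neg =>
    rw [pvUnionCell_eq, if_neg hpos]
    refine pvInvE_congr (fun x y => ?_) inv
    have hnp : ∀ z, pvValid R C g z → z ∈ Pref ++ [p] → z ∈ Pref := by
      intro z hz hmem
      rcases List.mem_append.mp hmem with h | h
      · exact h
      · rw [List.mem_singleton] at h
        subst h
        exact absurd hz.2.2.2.2 hpos
    constructor
    · rintro ⟨h1, h2, h3⟩
      exact ⟨h1, h2, by
        simp only [List.mem_append] at *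
        tauto⟩
    · rintro ⟨h1, h2, h3⟩
      refine ⟨h1, h2, ?_⟩
      rcases h3 with ⟨ha, hb⟩ | ⟨ha, hb⟩ | ⟨ha, hb⟩ | ⟨ha, hb⟩
      · exact Or.inl ⟨ha, hnp x h1 hb⟩
      · exact Or.inr (Or.inl ⟨ha, hnp y h2 hb⟩)
      · exact Or.inr (Or.inr (Or.inl ⟨ha, hnp x h1 hb⟩))
      · exact Or.inr (Or.inr (Or.inr ⟨ha, hnp y h2 hb⟩))
  case pos =>
    have hvp : pvValid R C g p := ⟨hb1, hb2, hb3, hb4, hpos⟩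
    have hcan : 0 ≤ p.1 ∧ 0 ≤ p.2 ∧ p.2 < C := ⟨hb1, hb3, hb4⟩
    have hcond1 : (p.2 + 1 < C ∧ 0 < pvCellGet g p.1 (p.2 + 1)) ↔
        pvValid R C g (pvNbRt p) := by
      constructor
      · intro ⟨h1, h2⟩
        simp only [pvValid, pvNbRt]
        exact ⟨hb1, hb2, by omega, h1, h2⟩
      · intro hv
        simp only [pvValid, pvNbRt] at hv
        exact ⟨hv.2.2.2.1, hv.2.2.2.2⟩
    have hcond2 : (p.1 + 1 < R ∧ 0 < pvCellGet g (p.1 + 1) p.2) ↔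
        pvValid R C g (pvNbDn p) := by
      constructor
      · intro ⟨h1, h2⟩
        simp only [pvValid, pvNbDn]
        exact ⟨by omega, h1, hb3, hb4, h2⟩
      · intro hv
        simp only [pvValid, pvNbDn] at hv
        exact ⟨hv.2.1, hv.2.2.2.2⟩
    rw [pvUnionCell_eq, if_pos hpos,
      show (p.1 * C + p.2).toNat = pvIdxC C p from rfl,
      ← pvIdxC_nbRt C p hcan, ← pvIdxC_nbDn C p hcan]
    by_cases hc1 : p.2 + 1 < C ∧ 0 < pvCellGet g p.1 (p.2 + 1) <;>
      by_cases hc2 : p.1 + 1 < R ∧ 0 < pvCellGet g (p.1 + 1) p.2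
    · rw [if_pos hc2, if_pos hc1]
      have hv1 := hcond1.mp hc1
      have hv2 := hcond2.mp hc2
      have s1 := pvUnionEdge_invE R C g _ par inv (pvEAdj_symm R C g Pref) p (pvNbRt p)
        hvp hv1
      have s2 := pvUnionEdge_invE R C g _ _ s1 (by
          intro x y h
          rcases h with h | h | h
          · exact Or.inl (pvEAdj_symm R C g Pref x y h)
          · exact Or.inr (Or.inr ⟨h.2, h.1⟩)
          · exact Or.inr (Or.inl ⟨h.2, h.1⟩)) p (pvNbDn p) hvp hv2
      refine pvInvE_congr (fun x y => ?_) s2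
      rw [pvEAdj_append R C g Pref p hvp x y]
      constructor
      · rintro ((h | h | h) | h | h)
        · exact Or.inl h
        · exact Or.inr (Or.inl ⟨hv1, Or.inl h⟩)
        · exact Or.inr (Or.inl ⟨hv1, Or.inr h⟩)
        · exact Or.inr (Or.inr ⟨hv2, Or.inl h⟩)
        · exact Or.inr (Or.inr ⟨hv2, Or.inr h⟩)
      · rintro (h | ⟨-, h | h⟩ | ⟨-, h | h⟩)
        · exact Or.inl (Or.inl h)
        · exact Or.inl (Or.inr (Or.inl h))
        · exact Or.inl (Or.inr (Or.inr h))
        · exact Or.inr (Or.inl h)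
        · exact Or.inr (Or.inr h)
    · rw [if_neg hc2, if_pos hc1]
      have hv1 := hcond1.mp hc1
      have s1 := pvUnionEdge_invE R C g _ par inv (pvEAdj_symm R C g Pref) p (pvNbRt p)
        hvp hv1
      refine pvInvE_congr (fun x y => ?_) s1
      rw [pvEAdj_append R C g Pref p hvp x y]
      have hnv2 : ¬ pvValid R C g (pvNbDn p) := fun hv => hc2 (hcond2.mpr hv)
      constructor
      · rintro (h | h | h)
        · exact Or.inl h
        · exact Or.inr (Or.inl ⟨hv1, Or.inl h⟩)
        · exact Or.inr (Or.inl ⟨hv1, Or.inr h⟩)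
      · rintro (h | ⟨-, h | h⟩ | ⟨hv, -⟩)
        · exact Or.inl h
        · exact Or.inr (Or.inl h)
        · exact Or.inr (Or.inr h)
        · exact absurd hv hnv2
    · rw [if_pos hc2, if_neg hc1]
      have hv2 := hcond2.mp hc2
      have s2 := pvUnionEdge_invE R C g _ par inv (pvEAdj_symm R C g Pref) p (pvNbDn p)
        hvp hv2
      refine pvInvE_congr (fun x y => ?_) s2
      rw [pvEAdj_append R C g Pref p hvp x y]
      have hnv1 : ¬ pvValid R C g (pvNbRt p) := fun hv => hc1 (hcond1.mpr hv)
      constructor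
      · rintro (h | h | h)
        · exact Or.inl h
        · exact Or.inr (Or.inr ⟨hv2, Or.inl h⟩)
        · exact Or.inr (Or.inr ⟨hv2, Or.inr h⟩)
      · rintro (h | ⟨hv, -⟩ | ⟨-, h | h⟩)
        · exact Or.inl h
        · exact absurd hv hnv1
        · exact Or.inr (Or.inl h)
        · exact Or.inr (Or.inr h)
    · rw [if_neg hc2, if_neg hc1]
      refine pvInvE_congr (fun x y => ?_) inv
      rw [pvEAdj_append R C g Pref p hvp x y]
      have hnv1 : ¬ pvValid R C g (pvNbRt p) := fun hv => hc1 (hcond1.mpr hv)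
      have hnv2 : ¬ pvValid R C g (pvNbDn p) := fun hv => hc2 (hcond2.mpr hv)
      constructor
      · exact fun h => Or.inl h
      · rintro (h | ⟨hv, -⟩ | ⟨hv, -⟩)
        · exact h
        · exact absurd hv hnv1
        · exact absurd hv hnv2

/-- Source B's whole first pass establishes the invariant for the full edge set -/

theorem pvUnion_fold (R C : Int) (g : List (List Int)) :
    ∀ (L Pref : List (Int × Int)) (par : List Nat), pvCells R C = Pref ++ L →
      pvInvE R C g (pvEAdj R C g Pref) par →
      pvInvE R C g (pvEAdj R C g (pvCells R C))
        (L.foldl (fun par p => pvUnionCell g R C p.1 par p.2) par) := by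
  intro L
  induction L with
  | nil =>
    intro Pref par hsplit inv
    rw [List.foldl_nil]
    rw [List.append_nil] at hsplit
    exact hsplit ▸ inv
  | cons p L ih =>
    intro Pref par hsplit inv
    rw [List.foldl_cons]
    have hp : p ∈ pvCells R C := by
      rw [hsplit]
      simp
    exact ih (Pref ++ [p]) _ (by rw [hsplit, List.append_assoc]; rfl)
      (pvUnionCell_invE R C g Pref par p hp inv)
-- ---- a generic flood-fill machine used to analyse A's BFS (proof layer only) ----
/-- the four neighbours as visited by the flood fill, head = first -/
def pvNb (p : Int × Int) : List (Int × Int) :=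
  [(p.1, p.2 - 1), (p.1 - 1, p.2), (p.1 + 1, p.2), (p.1, p.2 + 1)]

/-- pop a cell, validate, mark, push its four neighbours -/
def pvDfsRun (R C : Int) (g : List (List Int)) (st : List (Int × Int)) (s n : Int) :
    Int × Int × List (List Int) :=
  match st with
  | [] => (s, n, g)
  | p :: rest =>
    if 0 ≤ p.1 ∧ p.1 < R ∧ 0 ≤ p.2 ∧ p.2 < C ∧ 0 < pvCellGet g p.1 p.2 then
      pvDfsRun R C (pvCellSet g p.1 p.2 (-1)) (pvNb p ++ rest) (s + pvCellGet g p.1 p.2) (n + 1)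
    else
      pvDfsRun R C g rest s n
termination_by 5 * pvCountPos g + st.length
decreasing_by
  · rename_i h
    have := pvCountPos_mark g p.1 p.2 h.2.2.2.2
    simp only [pvNb, List.length_append, List.length_cons, List.length_nil]
    omega
  · simp only [List.length_cons]; omega

def pvMarkL (g : List (List Int)) (l : List (Int × Int)) : List (List Int) :=
  l.foldl pvMark g

theorem pvDfsRun_cons_pos (R C : Int) (g : List (List Int)) (p : Int × Int)
    (rest : List (Int × Int)) (s n : Int) (h : pvValid R C g p) :
    pvDfsRun R C g (p :: rest) s n
      = pvDfsRun R C (pvMark g p) (pvNb p ++ rest) (s + pvCellGet g p.1 p.2) (n + 1) := by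
  rw [pvDfsRun, pvMark]
  exact if_pos h

theorem pvDfsRun_cons_neg (R C : Int) (g : List (List Int)) (p : Int × Int)
    (rest : List (Int × Int)) (s n : Int) (h : ¬ pvValid R C g p) :
    pvDfsRun R C g (p :: rest) s n = pvDfsRun R C g rest s n := by
  rw [pvDfsRun]
  exact if_neg h

-- ---- cell-level facts ----
theorem pvCellGet_congr (g : List (List Int)) (r c r' c' : Int)
    (hr : r.toNat = r'.toNat) (hc : c.toNat = c'.toNat) :
    pvCellGet g r c = pvCellGet g r' c' := by
  simp [pvCellGet, hr, hc]

theorem pvCellGet_set_self (g : List (List Int)) (r c v : Int)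
    (hi : r.toNat < g.length) (hj : c.toNat < (g.getD r.toNat []).length) :
    pvCellGet (pvCellSet g r c v) r c = v := by
  have h1 : (g.set r.toNat ((g.getD r.toNat []).set c.toNat v)).getD r.toNat []
      = (g.getD r.toNat []).set c.toNat v := by
    simp [List.getD_eq_getElem?_getD, hi]
  rw [pvCellGet, pvCellSet, h1]
  simp only [List.getD_eq_getElem?_getD] at hj
  simp [List.getD_eq_getElem?_getD, hj]

theorem pvCellGet_set_other (g : List (List Int)) (r c r' c' v : Int)
    (h : r.toNat ≠ r'.toNat ∨ c.toNat ≠ c'.toNat) :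
    pvCellGet (pvCellSet g r c v) r' c' = pvCellGet g r' c' := by
  by_cases hr : r.toNat = r'.toNat
  · have hc : c.toNat ≠ c'.toNat := h.resolve_left (fun hne => hne hr)
    rw [pvCellGet, pvCellSet, pvCellGet, ← hr]
    by_cases hlen : r.toNat < g.length
    · have h1 : (g.set r.toNat ((g.getD r.toNat []).set c.toNat v)).getD r.toNat []
          = (g.getD r.toNat []).set c.toNat v := by
        simp [List.getD_eq_getElem?_getD, hlen]
      rw [h1]
      simp [List.getD_eq_getElem?_getD, List.getElem?_set_ne, hc]
    · rw [List.set_eq_of_length_le (show g.length ≤ r.toNat by omega)]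
  · rw [pvCellGet, pvCellSet, pvCellGet]
    have h1 : (g.set r.toNat ((g.getD r.toNat []).set c.toNat v)).getD r'.toNat []
        = g.getD r'.toNat [] := by
      simp [List.getD_eq_getElem?_getD, List.getElem?_set_ne, hr]
    rw [h1]

theorem pvCellGet_mark_cases (g : List (List Int)) (q : Int × Int) (r c : Int) :
    pvCellGet (pvMark g q) r c = pvCellGet g r c ∨ pvCellGet (pvMark g q) r c = -1 := by
  by_cases h1 : q.1.toNat = r.toNat ∧ q.2.toNat = c.toNat
  · by_cases hi : q.1.toNat < g.length
    · by_cases hj : q.2.toNat < (g.getD q.1.toNat []).length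
      · right
        rw [pvMark, ← pvCellGet_congr _ q.1 q.2 r c h1.1 h1.2]
        exact pvCellGet_set_self g q.1 q.2 (-1) hi hj
      · left
        have h2 : (g.getD q.1.toNat []).set q.2.toNat (-1) = g.getD q.1.toNat [] :=
          List.set_eq_of_length_le (by omega)
        rw [pvMark, pvCellSet, h2]
        have h3 : g.set q.1.toNat (g.getD q.1.toNat []) = g := by
          simp [List.getD_eq_getElem?_getD, List.getElem?_eq_getElem hi]
        rw [h3]
    · left
      rw [pvMark, pvCellSet, List.set_eq_of_length_le (show g.length ≤ q.1.toNat by omega)]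
  · exact Or.inl (pvCellGet_set_other g q.1 q.2 r c (-1) (not_and_or.mp h1))

theorem pvCellGet_mark_ne (g : List (List Int)) (q : Int × Int) (r c : Int)
    (h : q.1.toNat ≠ r.toNat ∨ q.2.toNat ≠ c.toNat) :
    pvCellGet (pvMark g q) r c = pvCellGet g r c :=
  pvCellGet_set_other g q.1 q.2 r c (-1) h

theorem pvValid_mark_mono (R C : Int) (g : List (List Int)) (p q : Int × Int)
    (h : ¬ pvValid R C g p) : ¬ pvValid R C (pvMark g q) p := by
  simp only [pvValid] at *
  rintro ⟨h1, h2, h3, h4, h5⟩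
  rcases pvCellGet_mark_cases g q p.1 p.2 with hc | hc
  · exact h ⟨h1, h2, h3, h4, hc ▸ h5⟩
  · omega

theorem pvValid_mark_self (R C : Int) (g : List (List Int)) (p : Int × Int)
    (h : pvValid R C g p) : ¬ pvValid R C (pvMark g p) p := by
  obtain ⟨hi, hj⟩ := pvCellGet_pos_bounds g p.1 p.2 h.2.2.2.2
  simp only [pvValid, pvMark]
  rw [pvCellGet_set_self g p.1 p.2 (-1) hi hj]
  rintro ⟨-, -, -, -, h5⟩
  omega

theorem pvValid_mark_of_ne (R C : Int) (g : List (List Int)) (p q : Int × Int)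
    (hp : pvValid R C g p) (hq : pvValid R C g q) (hne : p ≠ q) :
    pvValid R C (pvMark g q) p := by
  have hco : q.1.toNat ≠ p.1.toNat ∨ q.2.toNat ≠ p.2.toNat := by
    by_contra hco
    simp only [not_or, not_not] at hco
    apply hne
    have h1 : p.1 = q.1 := by have := hco.1; have := hp.1; have := hq.1; omega
    have h2 : p.2 = q.2 := by have := hco.2; have := hp.2.2.1; have := hq.2.2.1; omega
    exact Prod.ext h1 h2
  refine ⟨hp.1, hp.2.1, hp.2.2.1, hp.2.2.2.1, ?_⟩
  rw [pvMark, pvCellGet_set_other g q.1 q.2 p.1 p.2 (-1) hco]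
  exact hp.2.2.2.2

theorem pvMark_comm (g : List (List Int)) (p q : Int × Int)
    (h : p.1.toNat ≠ q.1.toNat ∨ p.2.toNat ≠ q.2.toNat) :
    pvMark (pvMark g p) q = pvMark (pvMark g q) p := by
  simp only [pvMark, pvCellSet]
  by_cases hi : p.1.toNat = q.1.toNat
  · have hc : p.2.toNat ≠ q.2.toNat := h.resolve_left (fun hne => hne hi)
    rw [← hi]
    by_cases hlen : p.1.toNat < g.length
    · have h1 : ∀ row : List Int, (g.set p.1.toNat row).getD p.1.toNat [] = row := by
        intro row
        simp [List.getD_eq_getElem?_getD, hlen]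
      rw [h1, h1, List.set_set, List.set_set, List.set_comm _ _ hc]
    · have hnoop : ∀ row : List Int, g.set p.1.toNat row = g := fun row =>
        List.set_eq_of_length_le (by omega)
      simp only [hnoop]
  · have h1 : ∀ row row' : List Int, (g.set p.1.toNat row).getD q.1.toNat [] = g.getD q.1.toNat []
        ∧ (g.set q.1.toNat row').getD p.1.toNat [] = g.getD p.1.toNat [] := by
      intro row row'
      constructor <;> simp [List.getD_eq_getElem?_getD, List.getElem?_set_ne, hi, Ne.symm hi]
    rw [(h1 _ []).1, (h1 [] _).2, List.set_comm _ _ hi]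

/-- marking commutes unconditionally: same cell twice is marking it twice either way -/
theorem pvMark_lcomm (g : List (List Int)) (p q : Int × Int) :
    pvMark (pvMark g p) q = pvMark (pvMark g q) p := by
  by_cases h : p.1.toNat ≠ q.1.toNat ∨ p.2.toNat ≠ q.2.toNat
  · exact pvMark_comm g p q h
  · simp only [not_or, not_not] at h
    have hmk : ∀ g' : List (List Int), pvMark g' p = pvMark g' q := by
      intro g'
      simp only [pvMark, pvCellSet, h.1, h.2]
    rw [hmk, hmk (pvMark g q), ← hmk g]

theorem pvCountPos_mark_lt (R C : Int) (g : List (List Int)) (p : Int × Int)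
    (h : pvValid R C g p) : pvCountPos (pvMark g p) < pvCountPos g := by
  have := pvCountPos_mark g p.1 p.2 h.2.2.2.2
  simp only [pvMark]
  omega

-- ---- any invalid pending entry can be dropped ----
theorem pvRun_drop (R C : Int) (g : List (List Int)) (P₁ : List (Int × Int)) (q : Int × Int)
    (P₂ : List (Int × Int)) (s n : Int) (hq : ¬ pvValid R C g q) :
    pvDfsRun R C g (P₁ ++ q :: P₂) s n = pvDfsRun R C g (P₁ ++ P₂) s n := by
  match P₁ with
  | [] =>
    rw [List.nil_append, List.nil_append, pvDfsRun_cons_neg R C g q P₂ s n hq]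
  | r :: P₁' =>
    by_cases hr : pvValid R C g r
    · rw [List.cons_append, List.cons_append,
        pvDfsRun_cons_pos R C g r _ s n hr, pvDfsRun_cons_pos R C g r _ s n hr,
        ← List.append_assoc, ← List.append_assoc]
      exact pvRun_drop R C (pvMark g r) (pvNb r ++ P₁') q P₂ _ _ (pvValid_mark_mono R C g q r hq)
    · rw [List.cons_append, List.cons_append,
        pvDfsRun_cons_neg R C g r _ s n hr, pvDfsRun_cons_neg R C g r _ s n hr]
      exact pvRun_drop R C g P₁' q P₂ s n hq
termination_by (pvCountPos g, P₁.length)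
decreasing_by
  · exact Prod.Lex.left _ _ (pvCountPos_mark_lt R C g r hr)
  · exact Prod.Lex.right _ (by simp)

mutual

theorem pvRun_mtf (R C : Int) (g : List (List Int)) (Q₁ : List (Int × Int)) (p : Int × Int)
    (Q₂ : List (Int × Int)) (s n : Int) :
    pvDfsRun R C g (Q₁ ++ p :: Q₂) s n = pvDfsRun R C g (p :: (Q₁ ++ Q₂)) s n := by
  match Q₁ with
  | [] => rfl
  | q :: Q₁' =>
    by_cases hq : pvValid R C g q
    · by_cases hp : pvValid R C g p
      · by_cases hpq : p = q
        · subst hpq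
          rw [List.cons_append, pvDfsRun_cons_pos R C g p _ s n hp,
            pvDfsRun_cons_pos R C g p _ s n hp]
          have hinv := pvValid_mark_self R C g p hp
          rw [show pvNb p ++ (Q₁' ++ p :: Q₂) = (pvNb p ++ Q₁') ++ p :: Q₂ by
                rw [List.append_assoc],
            pvRun_drop R C (pvMark g p) (pvNb p ++ Q₁') p Q₂ _ _ hinv,
            List.append_assoc]
          rw [show (p :: Q₁') ++ Q₂ = p :: (Q₁' ++ Q₂) from rfl,
            pvRun_drop R C (pvMark g p) (pvNb p) p (Q₁' ++ Q₂) _ _ hinv]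
        · have hco : p.1.toNat ≠ q.1.toNat ∨ p.2.toNat ≠ q.2.toNat := by
            by_contra hco
            simp only [not_or, not_not] at hco
            apply hpq
            have h1 : p.1 = q.1 := by have := hco.1; have := hp.1; have := hq.1; omega
            have h2 : p.2 = q.2 := by
              have := hco.2; have := hp.2.2.1; have := hq.2.2.1; omega
            exact Prod.ext h1 h2
          rw [List.cons_append, pvDfsRun_cons_pos R C g q _ s n hq,
            show pvNb q ++ (Q₁' ++ p :: Q₂) = (pvNb q ++ Q₁') ++ p :: Q₂ by
              rw [List.append_assoc],
            pvRun_mtf R C (pvMark g q) (pvNb q ++ Q₁') p Q₂ _ _,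
            pvDfsRun_cons_pos R C (pvMark g q) p _ _ _
              (pvValid_mark_of_ne R C g p q hp hq hpq)]
          rw [pvDfsRun_cons_pos R C g p _ s n hp,
            show pvNb p ++ ((q :: Q₁') ++ Q₂) = pvNb p ++ (q :: (Q₁' ++ Q₂)) from rfl,
            pvRun_mtf R C (pvMark g p) (pvNb p) q (Q₁' ++ Q₂) _ _,
            pvDfsRun_cons_pos R C (pvMark g p) q _ _ _
              (pvValid_mark_of_ne R C g q p hq hp (Ne.symm hpq))]
          have hco' : q.1.toNat ≠ p.1.toNat ∨ q.2.toNat ≠ p.2.toNat := by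
            rcases hco with h | h
            · exact Or.inl (Ne.symm h)
            · exact Or.inr (Ne.symm h)
          rw [pvCellGet_mark_ne g q p.1 p.2 hco', pvCellGet_mark_ne g p q.1 q.2 hco]
          rw [show pvMark (pvMark g q) p = pvMark (pvMark g p) q from
            (pvMark_comm g p q hco).symm]
          rw [show s + pvCellGet g q.1 q.2 + pvCellGet g p.1 p.2
              = s + pvCellGet g p.1 p.2 + pvCellGet g q.1 q.2 by ring]
          have hperm : (pvNb p ++ (pvNb q ++ Q₁' ++ Q₂)).Perm
              (pvNb q ++ (pvNb p ++ (Q₁' ++ Q₂))) := by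
            simpa [List.append_assoc] using
              (List.perm_append_comm (l₁ := pvNb p) (l₂ := pvNb q)).append_right (Q₁' ++ Q₂)
          exact pvRun_perm R C (pvMark (pvMark g p) q) _ _ hperm _ _
      · rw [List.cons_append, pvDfsRun_cons_pos R C g q _ s n hq,
          pvDfsRun_cons_neg R C g p _ s n hp, List.cons_append,
          pvDfsRun_cons_pos R C g q _ s n hq,
          show pvNb q ++ (Q₁' ++ p :: Q₂) = (pvNb q ++ Q₁') ++ p :: Q₂ by
            rw [List.append_assoc],
          pvRun_drop R C (pvMark g q) (pvNb q ++ Q₁') p Q₂ _ _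
            (pvValid_mark_mono R C g p q hp),
          List.append_assoc]
    · rw [List.cons_append, pvDfsRun_cons_neg R C g q _ s n hq,
        pvRun_mtf R C g Q₁' p Q₂ s n]
      by_cases hp : pvValid R C g p
      · rw [pvDfsRun_cons_pos R C g p _ s n hp, pvDfsRun_cons_pos R C g p _ s n hp,
          show pvNb p ++ ((q :: Q₁') ++ Q₂) = pvNb p ++ (q :: (Q₁' ++ Q₂)) from rfl,
          show pvNb p ++ (q :: (Q₁' ++ Q₂)) = (pvNb p) ++ q :: (Q₁' ++ Q₂) from rfl,
          pvRun_drop R C (pvMark g p) (pvNb p) q (Q₁' ++ Q₂) _ _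
            (pvValid_mark_mono R C g q p hq)]
      · rw [pvDfsRun_cons_neg R C g p _ s n hp, pvDfsRun_cons_neg R C g p _ s n hp,
          List.cons_append, pvDfsRun_cons_neg R C g q _ s n hq]
termination_by (pvCountPos g, 0, Q₁.length)
decreasing_by
  · exact Prod.Lex.left _ _ (pvCountPos_mark_lt R C g q hq)
  · exact Prod.Lex.left _ _ (pvCountPos_mark_lt R C g p hp)
  · exact Prod.Lex.left _ _
      (Nat.lt_trans (pvCountPos_mark_lt R C (pvMark g p) q
        (pvValid_mark_of_ne R C g q p hq hp (Ne.symm hpq)))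
        (pvCountPos_mark_lt R C g p hp))
  · exact Prod.Lex.right _ (Prod.Lex.right _ (by simp))

theorem pvRun_perm (R C : Int) (g : List (List Int)) (P Q : List (Int × Int))
    (h : P.Perm Q) (s n : Int) :
    pvDfsRun R C g P s n = pvDfsRun R C g Q s n := by
  match P with
  | [] =>
    rw [← h.nil_eq]
  | p :: P' =>
    have hmem : p ∈ Q := h.mem_iff.mp List.mem_cons_self
    obtain ⟨Q₁, Q₂, rfl⟩ := List.append_of_mem hmem
    rw [pvRun_mtf R C g Q₁ p Q₂ s n]
    have h' : P'.Perm (Q₁ ++ Q₂) := (h.trans List.perm_middle).cons_inv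
    by_cases hp : pvValid R C g p
    · rw [pvDfsRun_cons_pos R C g p _ s n hp, pvDfsRun_cons_pos R C g p _ s n hp]
      exact pvRun_perm R C (pvMark g p) _ _ (h'.append_left (pvNb p)) _ _
    · rw [pvDfsRun_cons_neg R C g p _ s n hp, pvDfsRun_cons_neg R C g p _ s n hp]
      exact pvRun_perm R C g P' (Q₁ ++ Q₂) h' s n
termination_by (pvCountPos g, 1, P.length)
decreasing_by
  · exact Prod.Lex.right _ (Prod.Lex.left _ _ (by omega))
  · exact Prod.Lex.left _ _ (pvCountPos_mark_lt R C g p hp)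
  · exact Prod.Lex.right _ (Prod.Lex.right _
      (by have := h'.length_eq; simp only [List.length_append, List.length_cons] at *; omega))

end

-- ---- A's BFS loop computes the same as the flood-fill machine ----
theorem pvBfsNbrs_to_run (R C : Int) (p : Int × Int) (ds : List (Int × Int)) :
    ∀ (g : List (List Int)) (q : List (Int × Int)) (s n : Int),
      pvDfsRun R C (pvBfsNbrs R C ds p g q s n).1
          ((pvBfsNbrs R C ds p g q s n).2.1.flatMap pvNb)
          (pvBfsNbrs R C ds p g q s n).2.2.1 (pvBfsNbrs R C ds p g q s n).2.2.2
        = pvDfsRun R C g ((ds.map (fun d => (p.1 + d.1, p.2 + d.2))) ++ q.flatMap pvNb) s n := by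
  induction ds with
  | nil => intro g q s n; simp [pvBfsNbrs]
  | cons d ds ih =>
    intro g q s n
    by_cases h : pvValid R C g (p.1 + d.1, p.2 + d.2)
    · have h2 : 0 ≤ p.1 + d.1 ∧ p.1 + d.1 < R ∧ 0 ≤ p.2 + d.2 ∧ p.2 + d.2 < C ∧
          0 < pvCellGet g (p.1 + d.1) (p.2 + d.2) := h
      have hstep : pvBfsNbrs R C (d :: ds) p g q s n
          = pvBfsNbrs R C ds p (pvCellSet g (p.1 + d.1) (p.2 + d.2) (-1))
            (q ++ [(p.1 + d.1, p.2 + d.2)]) (s + pvCellGet g (p.1 + d.1) (p.2 + d.2)) (n + 1) := by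
        simp only [pvBfsNbrs]
        rw [if_pos h2]
      rw [hstep, ih]
      rw [List.map_cons, List.cons_append,
        pvDfsRun_cons_pos R C g (p.1 + d.1, p.2 + d.2) _ s n h]
      have hg : pvMark g (p.1 + d.1, p.2 + d.2) = pvCellSet g (p.1 + d.1) (p.2 + d.2) (-1) := rfl
      rw [hg]
      refine Eq.symm (pvRun_perm R C _ _ _ ?_ _ _)
      have h1 := List.perm_append_comm (l₁ := pvNb (p.1 + d.1, p.2 + d.2))
        (l₂ := ds.map (fun d => (p.1 + d.1, p.2 + d.2)) ++ q.flatMap pvNb)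
      simpa [List.append_assoc] using h1
    · have hstep : pvBfsNbrs R C (d :: ds) p g q s n = pvBfsNbrs R C ds p g q s n := by
        simp only [pvBfsNbrs]
        rw [if_neg (show ¬(0 ≤ p.1 + d.1 ∧ p.1 + d.1 < R ∧ 0 ≤ p.2 + d.2 ∧ p.2 + d.2 < C ∧
          0 < pvCellGet g (p.1 + d.1) (p.2 + d.2)) from h)]
      rw [hstep, ih, List.map_cons, List.cons_append,
        pvDfsRun_cons_neg R C g (p.1 + d.1, p.2 + d.2) _ s n h]

theorem pvBfsLoop_to_run (R C : Int) (g : List (List Int)) (q : List (Int × Int)) (s n : Int) :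
    pvBfsLoop R C g q s n = pvDfsRun R C g (q.flatMap pvNb) s n := by
  match q with
  | [] => simp [pvBfsLoop, pvDfsRun]
  | p :: rest =>
    rw [pvBfsLoop]
    rw [pvBfsLoop_to_run R C _ _ _ _]
    rw [pvBfsNbrs_to_run R C p pvDirs g rest s n]
    have hmap : pvDirs.map (fun d => (p.1 + d.1, p.2 + d.2)) = (pvNb p).reverse := by
      simp [pvDirs, pvNb, sub_eq_add_neg]
    rw [hmap, List.flatMap_cons]
    exact pvRun_perm R C g _ _ ((List.reverse_perm (pvNb p)).append_right _) s n
termination_by 5 * pvCountPos g + q.length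
decreasing_by
  have := pvBfsNbrs_measure R C pvDirs p g rest s n
  simp only [List.length_cons]
  omega

theorem pvCall_eq (R C : Int) (g : List (List Int)) (r c : Int) (hv : pvValid R C g (r, c)) :
    pvBfsLoop R C (pvCellSet g r c (-1)) [(r, c)] (pvCellGet g r c) 1
      = pvDfsRun R C g [(r, c)] 0 0 := by
  rw [pvBfsLoop_to_run, pvDfsRun_cons_pos R C g (r, c) [] 0 0 hv]
  simp only [pvMark, List.flatMap_cons, List.flatMap_nil, zero_add]
-- ---- grids with a finite set of cells marked ----
def pvInB (g : List (List Int)) (p : Int × Int) : Prop :=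
  p.1.toNat < g.length ∧ p.2.toNat < (g.getD p.1.toNat []).length

theorem pvMark_length (g : List (List Int)) (q : Int × Int) :
    (pvMark g q).length = g.length := by
  simp [pvMark, pvCellSet]

theorem pvMark_rowlen (g : List (List Int)) (q : Int × Int) (i : Nat) :
    ((pvMark g q).getD i []).length = (g.getD i []).length := by
  simp only [pvMark, pvCellSet]
  by_cases hi : i = q.1.toNat
  · rw [hi]
    by_cases hl : q.1.toNat < g.length
    · rw [List.getD_eq_getElem?_getD, List.getElem?_set_self hl]
      simp
    · rw [List.set_eq_of_length_le (by omega)]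
  · by_cases hl : q.1.toNat < g.length
    · rw [List.getD_eq_getElem?_getD, List.getElem?_set_ne (by omega),
        ← List.getD_eq_getElem?_getD]
    · rw [List.set_eq_of_length_le (by omega)]

theorem pvInB_mark (g : List (List Int)) (q p : Int × Int) (h : pvInB g p) :
    pvInB (pvMark g q) p := by
  obtain ⟨h1, h2⟩ := h
  exact ⟨by rw [pvMark_length]; exact h1, by rw [pvMark_rowlen]; exact h2⟩

theorem pvMarkL_get (g : List (List Int)) (l : List (Int × Int))
    (hl : ∀ m ∈ l, 0 ≤ m.1 ∧ 0 ≤ m.2 ∧ pvInB g m) (q : Int × Int)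
    (hq : 0 ≤ q.1 ∧ 0 ≤ q.2) :
    pvCellGet (pvMarkL g l) q.1 q.2 = if q ∈ l then -1 else pvCellGet g q.1 q.2 := by
  induction l generalizing g with
  | nil => simp [pvMarkL]
  | cons m l ih =>
    have hm := hl m List.mem_cons_self
    have hstep : pvMarkL g (m :: l) = pvMarkL (pvMark g m) l := rfl
    rw [hstep, ih (pvMark g m)
      (fun x hx => ⟨(hl x (List.mem_cons_of_mem m hx)).1, (hl x (List.mem_cons_of_mem m hx)).2.1,
        pvInB_mark g m x (hl x (List.mem_cons_of_mem m hx)).2.2⟩)]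
    by_cases hql : q ∈ l
    · rw [if_pos hql, if_pos (List.mem_cons_of_mem m hql)]
    · rw [if_neg hql]
      by_cases hqm : q = m
      · subst hqm
        rw [if_pos List.mem_cons_self, pvMark,
          pvCellGet_set_self g q.1 q.2 (-1) hm.2.2.1 hm.2.2.2]
      · rw [if_neg (by simp [hqm, hql]), pvCellGet_mark_ne g m q.1 q.2 ?_]
        by_contra hco
        simp only [not_or, not_not] at hco
        apply hqm
        have e1 : q.1 = m.1 := by have := hm.1; have := hq.1; omega
        have e2 : q.2 = m.2 := by have := hm.2.1; have := hq.2; omega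
        exact Prod.ext e1.symm e2.symm |>.symm

noncomputable def pvMarkS (g : List (List Int)) (M : Finset (Int × Int)) : List (List Int) :=
  pvMarkL g M.toList

theorem pvMarkL_perm (g : List (List Int)) {l l' : List (Int × Int)} (h : l.Perm l') :
    pvMarkL g l = pvMarkL g l' :=
  h.foldl_eq' (fun p _ q _ g' => pvMark_lcomm g' p q) g

theorem pvMarkL_mark_comm (g : List (List Int)) (l : List (Int × Int)) (p : Int × Int) :
    pvMarkL (pvMark g p) l = pvMark (pvMarkL g l) p := by
  induction l generalizing g with
  | nil => rfl
  | cons m l ih =>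
    have h1 : pvMarkL (pvMark g p) (m :: l) = pvMarkL (pvMark (pvMark g p) m) l := rfl
    rw [h1, pvMark_lcomm g p m, ih]
    rfl

theorem pvMarkS_insert (g : List (List Int)) (M : Finset (Int × Int)) (p : Int × Int)
    (hp : p ∉ M) : pvMarkS g (insert p M) = pvMark (pvMarkS g M) p := by
  rw [pvMarkS, pvMarkL_perm g (Finset.toList_insert hp), pvMarkS]
  exact pvMarkL_mark_comm g M.toList p

theorem pvMarkS_get (R C : Int) (g : List (List Int)) (M : Finset (Int × Int))
    (hM : ∀ m ∈ M, pvValid R C g m) (q : Int × Int) (hq : 0 ≤ q.1 ∧ 0 ≤ q.2) :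
    pvCellGet (pvMarkS g M) q.1 q.2 = if q ∈ M then -1 else pvCellGet g q.1 q.2 := by
  rw [pvMarkS, pvMarkL_get g M.toList ?_ q hq]
  · simp only [Finset.mem_toList]
  · intro m hm
    have hv := hM m (Finset.mem_toList.mp hm)
    exact ⟨hv.1, hv.2.2.1, pvCellGet_pos_bounds g m.1 m.2 hv.2.2.2.2⟩

theorem pvValid_markS (R C : Int) (g : List (List Int)) (M : Finset (Int × Int))
    (hM : ∀ m ∈ M, pvValid R C g m) (p : Int × Int) :
    pvValid R C (pvMarkS g M) p ↔ pvValid R C g p ∧ p ∉ M := by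
  by_cases hb : 0 ≤ p.1 ∧ p.1 < R ∧ 0 ≤ p.2 ∧ p.2 < C
  · have hget := pvMarkS_get R C g M hM p ⟨hb.1, hb.2.2.1⟩
    by_cases hm : p ∈ M
    · rw [if_pos hm] at hget
      simp only [pvValid, hget]
      constructor
      · rintro ⟨-, -, -, -, h⟩; omega
      · rintro ⟨-, h⟩; exact absurd hm h
    · rw [if_neg hm] at hget
      simp only [pvValid, hget]
      tauto
  · constructor
    · rintro ⟨h1, h2, h3, h4, -⟩
      exact absurd ⟨h1, h2, h3, h4⟩ hb
    · rintro ⟨⟨h1, h2, h3, h4, -⟩, -⟩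
      exact absurd ⟨h1, h2, h3, h4⟩ hb

theorem pvMarkS_empty (g : List (List Int)) : pvMarkS g ∅ = g := by
  rw [pvMarkS, Finset.toList_empty]
  rfl
-- ---- flood fill computes exactly the reachable set ----
def pvAdjM (R C : Int) (g : List (List Int)) (M : Finset (Int × Int))
    (a b : Int × Int) : Prop :=
  pvAdj R C g a b ∧ a ∉ M ∧ b ∉ M

def pvReachM (R C : Int) (g : List (List Int)) (M : Finset (Int × Int))
    (x q : Int × Int) : Prop :=
  pvValid R C g x ∧ x ∉ M ∧ Relation.ReflTransGen (pvAdjM R C g M) x q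

noncomputable def pvUF (R C : Int) (g : List (List Int)) (M : Finset (Int × Int))
    (P : List (Int × Int)) : Finset (Int × Int) :=
  @Finset.filter _ (fun q => ∃ x ∈ P, pvReachM R C g M x q)
    (Classical.decPred _) ((pvCells R C).toFinset)

theorem pvReachM_valid (R C : Int) (g : List (List Int)) (M : Finset (Int × Int))
    {x q : Int × Int} (h : pvReachM R C g M x q) : pvValid R C g q ∧ q ∉ M := by
  obtain ⟨hv, hm, hpath⟩ := h
  induction hpath with
  | refl => exact ⟨hv, hm⟩
  | tail _ hstep _ => exact ⟨hstep.1.2.1, hstep.2.2⟩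

theorem pvMem_UF (R C : Int) (g : List (List Int)) (M : Finset (Int × Int))
    (P : List (Int × Int)) (q : Int × Int) :
    q ∈ pvUF R C g M P ↔ ∃ x ∈ P, pvReachM R C g M x q := by
  rw [pvUF,
    @Finset.mem_filter _ (fun q => ∃ x ∈ P, pvReachM R C g M x q) (Classical.decPred _)
      ((pvCells R C).toFinset) q]
  constructor
  · exact fun h => h.2
  · intro h
    refine ⟨?_, h⟩
    obtain ⟨x, -, hr⟩ := h
    have hq := (pvReachM_valid R C g M hr).1
    exact List.mem_toFinset.mpr ((pvMem_cells R C q).mpr ⟨hq.1, hq.2.1, hq.2.2.1, hq.2.2.2.1⟩)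

theorem pvAdj_iff_nb (R C : Int) (g : List (List Int)) (p x : Int × Int) :
    pvAdj R C g p x ↔ pvValid R C g p ∧ pvValid R C g x ∧ x ∈ pvNb p := by
  obtain ⟨p1, p2⟩ := p
  obtain ⟨x1, x2⟩ := x
  simp only [pvAdj, pvNb, pvNbRt, pvNbDn, List.mem_cons, List.not_mem_nil, or_false,
    Prod.mk.injEq]
  constructor
  · rintro ⟨h1, h2, h⟩
    exact ⟨h1, h2, by omega⟩
  · rintro ⟨h1, h2, h⟩
    exact ⟨h1, h2, by omega⟩

/-- a p-avoiding path lifts to the grid with p additionally marked -/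
theorem pvRtg_lift_insert (R C : Int) (g : List (List Int)) (M : Finset (Int × Int))
    (p y q : Int × Int) (hy : y ∉ M) (hyp : y ≠ p)
    (h : Relation.ReflTransGen (fun a b => pvAdjM R C g M a b ∧ b ≠ p) y q) :
    Relation.ReflTransGen (pvAdjM R C g (insert p M)) y q := by
  have main : ∀ z, Relation.ReflTransGen (fun a b => pvAdjM R C g M a b ∧ b ≠ p) y z →
      (z = y ∨ z ≠ p) ∧ Relation.ReflTransGen (pvAdjM R C g (insert p M)) y z := by
    intro z hz
    induction hz with
    | refl => exact ⟨Or.inl rfl, .refl⟩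
    | tail _ hstep ih =>
      rename_i c d _
      obtain ⟨⟨hadj, hcM, hdM⟩, hdp⟩ := hstep
      have hcp : c ≠ p := by
        rcases ih.1 with h | h
        · rw [h]; exact hyp
        · exact h
      refine ⟨Or.inr hdp, ih.2.tail ⟨hadj, ?_, ?_⟩⟩
      · simp only [Finset.mem_insert, not_or]
        exact ⟨hcp, hcM⟩
      · simp only [Finset.mem_insert, not_or]
        exact ⟨hdp, hdM⟩
  exact (main q h).2

theorem pvRtg_demote (R C : Int) (g : List (List Int)) (M : Finset (Int × Int))
    (p : Int × Int) {y q : Int × Int}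
    (h : Relation.ReflTransGen (pvAdjM R C g (insert p M)) y q) :
    Relation.ReflTransGen (pvAdjM R C g M) y q := by
  refine h.mono (fun a b hab => ?_)
  obtain ⟨h1, h2, h3⟩ := hab
  simp only [Finset.mem_insert, not_or] at h2 h3
  exact ⟨h1, h2.2, h3.2⟩

/-- the key step identity for the flood front -/
theorem pvUF_step (R C : Int) (g : List (List Int)) (M : Finset (Int × Int))
    (p : Int × Int) (rest : List (Int × Int)) (hvp : pvValid R C g p) (hpM : p ∉ M) :
    pvUF R C g M (p :: rest)
      = insert p (pvUF R C g (insert p M) (pvNb p ++ rest)) := by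
  have hfromp : ∀ q, pvReachM R C g M p q →
      q = p ∨ q ∈ pvUF R C g (insert p M) (pvNb p ++ rest) := by
    intro q hr
    by_cases hqp : q = p
    · exact Or.inl hqp
    · right
      obtain ⟨-, -, hpath⟩ := hr
      obtain ⟨y, hstep, hrest⟩ := pvRtg_start_avoid p q hpath hqp
      obtain ⟨hadj, hpM', hyM⟩ := hstep
      have hyv : pvValid R C g y := hadj.2.1
      have hyp : y ≠ p := pvAdj_ne R C g hadj
      have hynb : y ∈ pvNb p := ((pvAdj_iff_nb R C g p y).mp hadj).2.2
      rw [pvMem_UF]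
      refine ⟨y, List.mem_append.mpr (Or.inl hynb), hyv, ?_, ?_⟩
      · simp only [Finset.mem_insert, not_or]
        exact ⟨hyp, hyM⟩
      · exact pvRtg_lift_insert R C g M p y q hyM hyp hrest
  ext q
  rw [Finset.mem_insert, pvMem_UF, pvMem_UF]
  constructor
  · rintro ⟨x, hx, hr⟩
    rcases List.mem_cons.mp hx with rfl | hxrest
    · exact hfromp q hr |>.imp id (fun h => (pvMem_UF _ _ _ _ _ _).mp h)
    · by_cases hxp : x = p
      · subst hxp
        exact hfromp q hr |>.imp id (fun h => (pvMem_UF _ _ _ _ _ _).mp h)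
      · obtain ⟨hvx, hxM, hpath⟩ := hr
        rcases pvRtg_avoid_or p x q hpath with havoid | hthrough
        · right
          refine ⟨x, List.mem_append.mpr (Or.inr hxrest), hvx, ?_, ?_⟩
          · simp only [Finset.mem_insert, not_or]
            exact ⟨hxp, hxM⟩
          · exact pvRtg_lift_insert R C g M p x q hxM hxp havoid
        · exact hfromp q ⟨hvp, hpM, hthrough⟩ |>.imp id
            (fun h => (pvMem_UF _ _ _ _ _ _).mp h)
  · rintro (heq | ⟨x, hx, hr⟩)
    · refine ⟨p, List.mem_cons_self, hvp, hpM, ?_⟩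
      rw [heq]
    · obtain ⟨hvx, hxM', hpath⟩ := hr
      have hxM : x ∉ M := by
        simp only [Finset.mem_insert, not_or] at hxM'
        exact hxM'.2
      have hpath' := pvRtg_demote R C g M p hpath
      rcases List.mem_append.mp hx with hnb | hrest
      · have hadj : pvAdj R C g p x := (pvAdj_iff_nb R C g p x).mpr ⟨hvp, hvx, hnb⟩
        exact ⟨p, List.mem_cons_self, hvp, hpM,
          Relation.ReflTransGen.head ⟨hadj, hpM, hxM⟩ hpath'⟩
      · exact ⟨x, List.mem_cons_of_mem p hrest, hvx, hxM, hpath'⟩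

theorem pvUF_nil (R C : Int) (g : List (List Int)) (M : Finset (Int × Int)) :
    pvUF R C g M [] = ∅ := by
  ext q
  rw [pvMem_UF]
  simp

theorem pvUF_skip (R C : Int) (g : List (List Int)) (M : Finset (Int × Int))
    (p : Int × Int) (rest : List (Int × Int)) (h : ¬ (pvValid R C g p ∧ p ∉ M)) :
    pvUF R C g M (p :: rest) = pvUF R C g M rest := by
  ext q
  rw [pvMem_UF, pvMem_UF]
  constructor
  · rintro ⟨x, hx, hr⟩
    rcases List.mem_cons.mp hx with rfl | hxrest
    · exact absurd ⟨hr.1, hr.2.1⟩ h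
    · exact ⟨x, hxrest, hr⟩
  · rintro ⟨x, hx, hr⟩
    exact ⟨x, List.mem_cons_of_mem p hx, hr⟩

theorem pvUF_not_mem_insert (R C : Int) (g : List (List Int)) (M : Finset (Int × Int))
    (p : Int × Int) (P : List (Int × Int)) :
    p ∉ pvUF R C g (insert p M) P := by
  intro hmem
  obtain ⟨x, -, hr⟩ := (pvMem_UF _ _ _ _ _ _).mp hmem
  exact absurd (Finset.mem_insert_self p M) (fun h => (pvReachM_valid R C g _ hr).2 h)

/-- the flood-fill machine on a marked grid collects exactly the reachable cells -/
theorem pvFlood (R C : Int) (g : List (List Int)) (M : Finset (Int × Int))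
    (hM : ∀ m ∈ M, pvValid R C g m) (P : List (Int × Int)) (s n : Int) :
    pvDfsRun R C (pvMarkS g M) P s n
      = (s + (pvUF R C g M P).sum (pvVal g), n + (pvUF R C g M P).card,
         pvMarkS g (M ∪ pvUF R C g M P)) := by
  match P with
  | [] =>
    rw [pvUF_nil]
    simp [pvDfsRun]
  | p :: rest =>
    by_cases hv : pvValid R C (pvMarkS g M) p
    · obtain ⟨hvp, hpM⟩ := (pvValid_markS R C g M hM p).mp hv
      have hM' : ∀ m ∈ insert p M, pvValid R C g m := by
        intro m hm
        rcases Finset.mem_insert.mp hm with rfl | hm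
        · exact hvp
        · exact hM m hm
      have hget : pvCellGet (pvMarkS g M) p.1 p.2 = pvCellGet g p.1 p.2 := by
        rw [pvMarkS_get R C g M hM p ⟨hvp.1, hvp.2.2.1⟩, if_neg hpM]
      rw [pvDfsRun_cons_pos R C (pvMarkS g M) p rest s n hv, hget,
        ← pvMarkS_insert g M p hpM,
        pvFlood R C g (insert p M) hM' (pvNb p ++ rest) _ _,
        pvUF_step R C g M p rest hvp hpM]
      have hpU : p ∉ pvUF R C g (insert p M) (pvNb p ++ rest) :=
        pvUF_not_mem_insert R C g M p (pvNb p ++ rest)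
      rw [Finset.sum_insert hpU, Finset.card_insert_of_notMem hpU]
      refine Prod.ext ?_ (Prod.ext ?_ ?_)
      · show s + pvCellGet g p.1 p.2 + _ = s + (pvVal g p + _)
        simp only [pvVal]
        ring
      · show n + 1 + _ = n + _
        push_cast
        ring
      · show pvMarkS g (insert p M ∪ _) = pvMarkS g (M ∪ insert p _)
        congr 1
        ext x
        simp only [Finset.mem_union, Finset.mem_insert]
        tauto
    · have hnp : ¬ (pvValid R C g p ∧ p ∉ M) :=
        fun hc => hv ((pvValid_markS R C g M hM p).mpr hc)
      rw [pvDfsRun_cons_neg R C (pvMarkS g M) p rest s n hv,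
        pvFlood R C g M hM rest s n, pvUF_skip R C g M p rest hnp]
termination_by (pvCountPos (pvMarkS g M), P.length)
decreasing_by
  · refine Prod.Lex.left _ _ ?_
    rw [pvMarkS_insert g M p hpM]
    exact pvCountPos_mark_lt R C (pvMarkS g M) p hv
  · exact Prod.Lex.right _ (by simp)
-- ---- the canonical per-component specification fold ----
noncomputable def pvClassF (R C : Int) (g : List (List Int)) (p : Int × Int) :
    Finset (Int × Int) :=
  @Finset.filter _ (fun q => pvReach R C g p q) (Classical.decPred _) ((pvCells R C).toFinset)

theorem pvMem_classF (R C : Int) (g : List (List Int)) (p q : Int × Int) :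
    q ∈ pvClassF R C g p ↔ q ∈ (pvCells R C).toFinset ∧ pvReach R C g p q := by
  rw [pvClassF,
    @Finset.mem_filter _ (fun q => pvReach R C g p q) (Classical.decPred _)
      ((pvCells R C).toFinset) q]

theorem pvMem_classF_of_valid (R C : Int) (g : List (List Int)) (p : Int × Int)
    (hp : pvValid R C g p) (q : Int × Int) :
    q ∈ pvClassF R C g p ↔ pvReach R C g p q := by
  rw [pvMem_classF]
  constructor
  · exact fun h => h.2
  · intro h
    have hq := pvReach_valid R C g hp h
    exact ⟨List.mem_toFinset.mpr ((pvMem_cells R C q).mpr ⟨hq.1, hq.2.1, hq.2.2.1, hq.2.2.2.1⟩), h⟩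

noncomputable def pvSpecFold (R C : Int) (g : List (List Int)) (tS : Int) :
    List (Int × Int) → Finset (Int × Int) → Int → Int
  | [], _, res => res
  | p :: L, M, res =>
    if pvValidB R C g p = true ∧ p ∉ M then
      pvSpecFold R C g tS L (M ∪ pvClassF R C g p)
        (res + (tS - (pvClassF R C g p).sum (pvVal g)) * ((pvClassF R C g p).card : Int))
    else pvSpecFold R C g tS L M res

-- ---- the invariant tying A's marked set to the processed prefix ----
def pvMchar (R C : Int) (g : List (List Int)) (M : Finset (Int × Int))
    (Pref : List (Int × Int)) : Prop :=
  ∀ q, q ∈ M ↔ (pvValid R C g q ∧ ∃ x ∈ Pref, pvValid R C g x ∧ pvReach R C g x q)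

theorem pvMchar_valid (R C : Int) (g : List (List Int)) {M : Finset (Int × Int)}
    {Pref : List (Int × Int)} (h : pvMchar R C g M Pref) :
    ∀ m ∈ M, pvValid R C g m :=
  fun m hm => ((h m).mp hm).1

theorem pvMchar_not_reach (R C : Int) (g : List (List Int)) {M : Finset (Int × Int)}
    {Pref : List (Int × Int)} (hch : pvMchar R C g M Pref) {p : Int × Int}
    (hvp : pvValid R C g p) (hpM : p ∉ M) :
    ∀ z, pvReach R C g p z → z ∉ M := by
  intro z hz hmem
  obtain ⟨-, x, hx, hvx, hreach⟩ := (hch z).mp hmem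
  exact hpM ((hch p).mpr ⟨hvp, x, hx, hvx,
    pvReach_trans R C g hreach (pvReach_symm R C g hz)⟩)

theorem pvMchar_reachM_iff (R C : Int) (g : List (List Int)) {M : Finset (Int × Int)}
    {Pref : List (Int × Int)} (hch : pvMchar R C g M Pref) {p : Int × Int}
    (hvp : pvValid R C g p) (hpM : p ∉ M) (q : Int × Int) :
    pvReachM R C g M p q ↔ pvReach R C g p q := by
  constructor
  · rintro ⟨-, -, hpath⟩
    exact hpath.mono (fun a b hab => hab.1)
  · intro hpath
    refine ⟨hvp, hpM, ?_⟩
    have hnot := pvMchar_not_reach R C g hch hvp hpM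
    clear hpM
    induction hpath with
    | refl => exact .refl
    | tail hsub hstep ih =>
      exact ih.tail ⟨hstep, hnot _ hsub, hnot _ (hsub.tail hstep)⟩

theorem pvMchar_fire (R C : Int) (g : List (List Int)) {M : Finset (Int × Int)}
    {Pref : List (Int × Int)} (hch : pvMchar R C g M Pref) {p : Int × Int}
    (hvp : pvValid R C g p) :
    pvMchar R C g (M ∪ pvClassF R C g p) (Pref ++ [p]) := by
  intro q
  rw [Finset.mem_union, hch q, pvMem_classF_of_valid R C g p hvp q]
  constructor
  · rintro (⟨hvq, x, hx, hvx, hr⟩ | hr)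
    · exact ⟨hvq, x, List.mem_append.mpr (Or.inl hx), hvx, hr⟩
    · exact ⟨pvReach_valid R C g hvp hr, p, List.mem_append.mpr (Or.inr List.mem_cons_self),
        hvp, hr⟩
  · rintro ⟨hvq, x, hx, hvx, hr⟩
    rcases List.mem_append.mp hx with hx | hx
    · exact Or.inl ⟨hvq, x, hx, hvx, hr⟩
    · rw [List.mem_singleton] at hx
      subst hx
      exact Or.inr hr

theorem pvMchar_skip (R C : Int) (g : List (List Int)) {M : Finset (Int × Int)}
    {Pref : List (Int × Int)} (hch : pvMchar R C g M Pref) {p : Int × Int}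
    (hp : ¬ (pvValid R C g p ∧ p ∉ M)) :
    pvMchar R C g M (Pref ++ [p]) := by
  intro q
  rw [hch q]
  constructor
  · rintro ⟨hvq, x, hx, hvx, hr⟩
    exact ⟨hvq, x, List.mem_append.mpr (Or.inl hx), hvx, hr⟩
  · rintro ⟨hvq, x, hx, hvx, hr⟩
    rcases List.mem_append.mp hx with hx | hx
    · exact ⟨hvq, x, hx, hvx, hr⟩
    · rw [List.mem_singleton] at hx
      rw [hx] at hvx hr
      by_cases hpM : p ∈ M
      · obtain ⟨-, y, hy, hvy, hry⟩ := (hch p).mp hpM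
        exact ⟨hvq, y, hy, hvy, pvReach_trans R C g hry hr⟩
      · exact absurd ⟨hvx, hpM⟩ hp

-- ---- the flooded set of a fresh cell is exactly its class ----
theorem pvUF_single_eq_class (R C : Int) (g : List (List Int)) {M : Finset (Int × Int)}
    {Pref : List (Int × Int)} (hch : pvMchar R C g M Pref) {p : Int × Int}
    (hvp : pvValid R C g p) (hpM : p ∉ M) :
    pvUF R C g M [p] = pvClassF R C g p := by
  ext q
  rw [pvMem_UF, pvMem_classF_of_valid R C g p hvp q]
  constructor
  · rintro ⟨x, hx, hr⟩
    rw [List.mem_singleton] at hx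
    subst hx
    exact (pvMchar_reachM_iff R C g hch hvp hpM q).mp hr
  · intro hr
    exact ⟨p, List.mem_singleton.mpr rfl, (pvMchar_reachM_iff R C g hch hvp hpM q).mpr hr⟩

-- ---- flattening a nested row/column fold ----
theorem pvFoldl_nested {σ : Type} (rs cs : List Int) (f : σ → (Int × Int) → σ) (st : σ) :
    rs.foldl (fun st r => cs.foldl (fun st c => f st (r, c)) st) st
      = (rs.flatMap (fun r => cs.map (fun c => (r, c)))).foldl f st := by
  induction rs generalizing st with
  | nil => rfl
  | cons r rs ih =>
    rw [List.foldl_cons, List.flatMap_cons, List.foldl_append, ih, List.foldl_map]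

-- ---- A's double loop computes the specification fold ----
theorem pvAfold (R C : Int) (g : List (List Int)) (tS : Int) :
    ∀ (L Pref : List (Int × Int)) (M : Finset (Int × Int)) (res : Int),
      pvCells R C = Pref ++ L → pvMchar R C g M Pref →
      (L.foldl (fun st (p : Int × Int) => pvAInner R C tS p.1 st p.2) (pvMarkS g M, res)).2
        = pvSpecFold R C g tS L M res := by
  intro L
  induction L with
  | nil =>
    intro Pref M res hsplit hch
    rfl
  | cons p L ih =>
    intro Pref M res hsplit hch
    have hp : p ∈ pvCells R C := by rw [hsplit]; simp
    obtain ⟨hb1, hb2, hb3, hb4⟩ := (pvMem_cells R C p).mp hp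
    have hMv := pvMchar_valid R C g hch
    have hget := pvMarkS_get R C g M hMv p ⟨hb1, hb3⟩
    rw [List.foldl_cons]
    by_cases hfire : pvValid R C g p ∧ p ∉ M
    · obtain ⟨hvp, hpM⟩ := hfire
      rw [if_neg hpM] at hget
      have hvmark : pvValid R C (pvMarkS g M) p :=
        (pvValid_markS R C g M hMv p).mpr ⟨hvp, hpM⟩
      have hstep : pvAInner R C tS p.1 (pvMarkS g M, res) p.2
          = (pvMarkS g (M ∪ pvClassF R C g p),
             res + (tS - (pvClassF R C g p).sum (pvVal g)) * ((pvClassF R C g p).card : Int)) := by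
        rw [pvAInner, if_pos (by rw [hget]; exact hvp.2.2.2.2)]
        have hcall : pvBfsLoop R C (pvCellSet (pvMarkS g M) p.1 p.2 (-1)) [(p.1, p.2)]
            (pvCellGet (pvMarkS g M) p.1 p.2) 1
              = pvDfsRun R C (pvMarkS g M) [(p.1, p.2)] 0 0 :=
          pvCall_eq R C (pvMarkS g M) p.1 p.2 hvmark
        rw [pvBfs]
        simp only []
        rw [hcall]
        have hfl := pvFlood R C g M hMv [(p.1, p.2)] 0 0
        have hpp : ((p.1 : Int), (p.2 : Int)) = p := rfl
        rw [hpp] at hfl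
        rw [hfl, pvUF_single_eq_class R C g hch hvp hpM]
        simp only [zero_add]
      rw [hstep, ih (Pref ++ [p]) (M ∪ pvClassF R C g p) _
        (by rw [hsplit, List.append_assoc]; rfl) (pvMchar_fire R C g hch hvp)]
      rw [pvSpecFold, if_pos ⟨(pvValidB_iff R C g p).mpr hvp, hpM⟩]
    · have hnofire : ¬ 0 < pvCellGet (pvMarkS g M) p.1 p.2 := by
        intro hpos
        by_cases hpM : p ∈ M
        · rw [if_pos hpM] at hget
          omega
        · rw [if_neg hpM] at hget
          exact hfire ⟨⟨hb1, hb2, hb3, hb4, by omega⟩, hpM⟩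
      have hstep : pvAInner R C tS p.1 (pvMarkS g M, res) p.2 = (pvMarkS g M, res) := by
        rw [pvAInner, if_neg hnofire]
      rw [hstep, ih (Pref ++ [p]) M res (by rw [hsplit, List.append_assoc]; rfl)
        (pvMchar_skip R C g hch hfire)]
      rw [pvSpecFold, if_neg (by
        intro ⟨h1, h2⟩
        exact hfire ⟨(pvValidB_iff R C g p).mp h1, h2⟩)]
-- ---- the first (row-major-least) cell of each component ----
def pvIsFirst (R C : Int) (g : List (List Int)) (p : Int × Int) : Prop :=
  pvValid R C g p ∧ ∀ x, pvValid R C g x → pvReach R C g p x → pvIdxC C p ≤ pvIdxC C x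

theorem pvIdxC_lt_of_rm (C : Int) (p q : Int × Int)
    (hp : 0 ≤ p.1 ∧ 0 ≤ p.2 ∧ p.2 < C) (hq : 0 ≤ q.1 ∧ 0 ≤ q.2 ∧ q.2 < C) :
    pvIdxC C p < pvIdxC C q ↔ pvRm C p < pvRm C q := by
  have h1 := pvIdxC_le_iff C p q hp hq
  have h2 := pvIdxC_le_iff C q p hq hp
  omega

theorem pvFirst_unique (R C : Int) (g : List (List Int)) {w w' : Int × Int}
    (h1 : pvIsFirst R C g w) (h2 : pvIsFirst R C g w') (hr : pvReach R C g w w') :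
    w = w' := by
  have ha := h1.2 w' h2.1 hr
  have hb := h2.2 w h1.1 (pvReach_symm R C g hr)
  have hcw : 0 ≤ w.1 ∧ 0 ≤ w.2 ∧ w.2 < C := ⟨h1.1.1, h1.1.2.2.1, h1.1.2.2.2.1⟩
  have hcw' : 0 ≤ w'.1 ∧ 0 ≤ w'.2 ∧ w'.2 < C := ⟨h2.1.1, h2.1.2.2.1, h2.1.2.2.2.1⟩
  exact (pvIdxC_eq_iff C w w' hcw hcw').mp (by omega)

/-- the root of a valid cell is the index of the first cell of its component -/
theorem pvRoot_w (R C : Int) (g : List (List Int)) (parF : List Nat)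
    (inv : pvInvE R C g (pvAdj R C g) parF) {p : Int × Int} (hvp : pvValid R C g p) :
    ∃ w, pvIsFirst R C g w ∧ pvReach R C g p w ∧
      pvRootF parF (pvIdxC C p) = pvIdxC C w := by
  obtain ⟨w, hw1, hw2, hw3, hw4⟩ := inv.root_min p hvp
  refine ⟨w, ⟨hw1, ?_⟩, hw2, hw3⟩
  intro x hx hr
  exact hw4 x hx (pvReach_trans R C g hw2 hr)

theorem pvRoot_first (R C : Int) (g : List (List Int)) (parF : List Nat)
    (inv : pvInvE R C g (pvAdj R C g) parF) {p : Int × Int} (hf : pvIsFirst R C g p) :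
    pvRootF parF (pvIdxC C p) = pvIdxC C p := by
  obtain ⟨w, hw1, hw2, hw3⟩ := pvRoot_w R C g parF inv hf.1
  rw [hw3, pvFirst_unique R C g hf hw1 hw2]

-- ---- partial component sums over a processed prefix ----
noncomputable def pvPSum (R C : Int) (g : List (List Int)) (Pref : List (Int × Int))
    (w : Int × Int) : Int :=
  ((pvClassF R C g w).filter (· ∈ Pref)).sum (pvVal g)

noncomputable def pvPCard (R C : Int) (g : List (List Int)) (Pref : List (Int × Int))
    (w : Int × Int) : Int :=
  (((pvClassF R C g w).filter (· ∈ Pref)).card : Int)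

theorem pvFilter_skip {S : Finset (Int × Int)} {p : Int × Int} (hp : p ∉ S)
    (Pref : List (Int × Int)) :
    S.filter (· ∈ Pref ++ [p]) = S.filter (· ∈ Pref) := by
  ext q
  simp only [Finset.mem_filter, List.mem_append, List.mem_singleton]
  constructor
  · rintro ⟨hS, h | h⟩
    · exact ⟨hS, h⟩
    · exact absurd (h ▸ hS) hp
  · rintro ⟨hS, h⟩
    exact ⟨hS, Or.inl h⟩

theorem pvFilter_add {S : Finset (Int × Int)} {p : Int × Int} (hpS : p ∈ S)
    {Pref : List (Int × Int)} (hpP : p ∉ Pref) :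
    S.filter (· ∈ Pref ++ [p]) = insert p (S.filter (· ∈ Pref))
      ∧ p ∉ S.filter (· ∈ Pref) := by
  constructor
  · ext q
    simp only [Finset.mem_filter, Finset.mem_insert, List.mem_append, List.mem_singleton]
    constructor
    · rintro ⟨hS, h | h⟩
      · exact Or.inr ⟨hS, h⟩
      · exact Or.inl h
    · rintro (rfl | ⟨hS, h⟩)
      · exact ⟨hpS, Or.inr rfl⟩
      · exact ⟨hS, Or.inl h⟩
  · simp only [Finset.mem_filter]
    rintro ⟨-, h⟩
    exact hpP h

-- ---- ordering facts at the split point ----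
theorem pvSplit_facts (R C : Int) {Pref L : List (Int × Int)} {p : Int × Int}
    (hsplit : pvCells R C = Pref ++ p :: L) :
    (∀ x ∈ Pref, pvRm C x < pvRm C p) ∧ (∀ x ∈ L, pvRm C p < pvRm C x) ∧ p ∉ Pref := by
  have hpw := pvCells_pairwise R C
  rw [hsplit, List.pairwise_append] at hpw
  obtain ⟨-, h2, h3⟩ := hpw
  have hL := List.pairwise_cons.mp h2
  refine ⟨fun x hx => h3 x hx p List.mem_cons_self, hL.1, fun hmem => ?_⟩
  have := h3 p hmem p List.mem_cons_self
  omega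

/-- at the head of the unprocessed suffix, "not yet flooded" = "first of its component" -/
theorem pvNotM_iff_first (R C : Int) (g : List (List Int)) {M : Finset (Int × Int)}
    {Pref L : List (Int × Int)} {p : Int × Int} (hch : pvMchar R C g M Pref)
    (hsplit : pvCells R C = Pref ++ p :: L) (hvp : pvValid R C g p) :
    p ∉ M ↔ pvIsFirst R C g p := by
  obtain ⟨hlt, hgt, hnp⟩ := pvSplit_facts R C hsplit
  have hcp : 0 ≤ p.1 ∧ 0 ≤ p.2 ∧ p.2 < C := ⟨hvp.1, hvp.2.2.1, hvp.2.2.2.1⟩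
  constructor
  · intro hpM
    refine ⟨hvp, ?_⟩
    intro x hx hr
    by_contra hcon
    have hcx : 0 ≤ x.1 ∧ 0 ≤ x.2 ∧ x.2 < C := ⟨hx.1, hx.2.2.1, hx.2.2.2.1⟩
    have hrm : pvRm C x < pvRm C p := by
      have := pvIdxC_lt_of_rm C x p hcx hcp
      have := pvIdxC_le_iff C p x hcp hcx
      omega
    have hxcells : x ∈ pvCells R C := (pvMem_cells R C x).mpr ⟨hx.1, hx.2.1, hx.2.2.1, hx.2.2.2.1⟩
    rw [hsplit] at hxcells
    rcases List.mem_append.mp hxcells with hxin | hxin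
    · exact hpM ((hch p).mpr ⟨hvp, x, hxin, hx, pvReach_symm R C g hr⟩)
    · rcases List.mem_cons.mp hxin with rfl | hxin
      · omega
      · have := hgt x hxin
        omega
  · intro hf hpM
    obtain ⟨-, x, hxin, hvx, hr⟩ := (hch p).mp hpM
    have hcx : 0 ≤ x.1 ∧ 0 ≤ x.2 ∧ x.2 < C := ⟨hvx.1, hvx.2.2.1, hvx.2.2.2.1⟩
    have h1 := hf.2 x hvx (pvReach_symm R C g hr)
    have h2 := hlt x hxin
    have := pvIdxC_le_iff C p x hcp hcx
    omega

theorem pvSpecFold_shift (R C : Int) (g : List (List Int)) (tS : Int)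
    (L : List (Int × Int)) (M : Finset (Int × Int)) (res : Int) :
    pvSpecFold R C g tS L M res = res + pvSpecFold R C g tS L M 0 := by
  induction L generalizing M res with
  | nil => simp [pvSpecFold]
  | cons p L ih =>
    rw [pvSpecFold, pvSpecFold]
    split
    · rw [ih, ih (res := 0 + _)]
      ring
    · exact ih M res
-- ---- Source B's second pass: per-root dictionaries compute the specification fold ----
def pvKeySum (tS : Int) (st : PySem.Dict Nat Int × PySem.Dict Nat Int) : Int :=
  st.1.keys.foldl (fun a k => a + (tS - st.1.getD k 0) * st.2.getD k 0) 0

theorem pvClassF_mem_valid (R C : Int) (g : List (List Int)) {w q : Int × Int}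
    (hw : pvValid R C g w) (hq : q ∈ pvClassF R C g w) : pvValid R C g q :=
  pvReach_valid R C g hw ((pvMem_classF_of_valid R C g w hw q).mp hq)

theorem pvNotMem_classF_invalid (R C : Int) (g : List (List Int)) {w p : Int × Int}
    (hw : pvValid R C g w) (hp : ¬ pvValid R C g p) : p ∉ pvClassF R C g w :=
  fun hmem => hp (pvClassF_mem_valid R C g hw hmem)

theorem pvCanon (R C : Int) (g : List (List Int)) {p : Int × Int}
    (hp : pvValid R C g p) : 0 ≤ p.1 ∧ 0 ≤ p.2 ∧ p.2 < C :=
  ⟨hp.1, hp.2.2.1, hp.2.2.2.1⟩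

/-- the unfolding equation of Source B's per-cell accumulation body -/
theorem pvAccCell_eq (g : List (List Int)) (C : Int) (par : List Nat) (r : Int)
    (st : PySem.Dict Nat Int × PySem.Dict Nat Int) (c : Int) :
    pvAccCell g C par r st c =
      if 0 < pvCellGet g r c then
        (st.1.insert (pvFind par par.length ((r * C + c).toNat))
          (st.1.getD (pvFind par par.length ((r * C + c).toNat)) 0 + pvCellGet g r c),
         st.2.insert (pvFind par par.length ((r * C + c).toNat))
          (st.2.getD (pvFind par par.length ((r * C + c).toNat)) 0 + 1))
      else st := rfl

theorem pvBdict (R C : Int) (g : List (List Int)) (tS : Int) (parF : List Nat)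
    (inv : pvInvE R C g (pvAdj R C g) parF) :
    ∀ (L Pref : List (Int × Int)) (M : Finset (Int × Int))
      (d1 d2 : PySem.Dict Nat Int) (EL : List (Int × Int)),
      pvCells R C = Pref ++ L → pvMchar R C g M Pref →
      d1.items = EL.map (fun w => (pvIdxC C w, pvPSum R C g Pref w)) →
      d2.items = EL.map (fun w => (pvIdxC C w, pvPCard R C g Pref w)) →
      (∀ w ∈ EL, pvIsFirst R C g w ∧ w ∈ Pref) →
      (∀ x ∈ Pref, pvValid R C g x → pvIsFirst R C g x → x ∈ EL) →
      EL.Nodup →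
      pvKeySum tS (L.foldl (fun st (p : Int × Int) => pvAccCell g C parF p.1 st p.2) (d1, d2))
        = (EL.map (fun w => (tS - (pvClassF R C g w).sum (pvVal g))
            * ((pvClassF R C g w).card : Int))).sum
          + pvSpecFold R C g tS L M 0 := by
  intro L
  induction L with
  | nil =>
    intro Pref M d1 d2 EL hsplit hch h1 h2 h3 h4 hnd
    rw [List.append_nil] at hsplit
    subst hsplit
    have hELval : ∀ w ∈ EL, pvValid R C g w := fun w hw => (h3 w hw).1.1
    have hkeys : d1.keys = EL.map (fun w => pvIdxC C w) := by
      simp only [PySem.Dict.keys, h1, List.map_map]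
      rfl
    have hkeysnd : d1.keys.Nodup := by
      rw [hkeys]
      refine List.Nodup.map_on ?_ hnd
      intro x hx y hy hxy
      exact (pvIdxC_eq_iff C x y (pvCanon R C g (hELval x hx))
        (pvCanon R C g (hELval y hy))).mp hxy
    have hkeysnd2 : d2.keys.Nodup := by
      have : d2.keys = EL.map (fun w => pvIdxC C w) := by
        simp only [PySem.Dict.keys, h2, List.map_map]
        rfl
      rw [this]
      refine List.Nodup.map_on ?_ hnd
      intro x hx y hy hxy
      exact (pvIdxC_eq_iff C x y (pvCanon R C g (hELval x hx))
        (pvCanon R C g (hELval y hy))).mp hxy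
    have hfull : ∀ w ∈ EL, (pvClassF R C g w).filter (· ∈ pvCells R C) = pvClassF R C g w := by
      intro w hw
      refine Finset.filter_true_of_mem ?_
      intro q hq
      have hv := pvClassF_mem_valid R C g (hELval w hw) hq
      exact (pvMem_cells R C q).mpr ⟨hv.1, hv.2.1, hv.2.2.1, hv.2.2.2.1⟩
    rw [List.foldl_nil, pvKeySum]
    dsimp only
    rw [PySem.List.foldl_add d1.keys (fun k => (tS - d1.getD k 0) * d2.getD k 0) 0]
    rw [hkeys, List.map_map]
    have hptw : ∀ w ∈ EL,
        ((fun k => (tS - d1.getD k 0) * d2.getD k 0) ∘ fun w => pvIdxC C w) w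
          = (tS - (pvClassF R C g w).sum (pvVal g)) * ((pvClassF R C g w).card : Int) := by
      intro w hw
      have hm1 : (pvIdxC C w, pvPSum R C g (pvCells R C) w) ∈ d1.items := by
        rw [h1]
        exact List.mem_map.mpr ⟨w, hw, rfl⟩
      have hm2 : (pvIdxC C w, pvPCard R C g (pvCells R C) w) ∈ d2.items := by
        rw [h2]
        exact List.mem_map.mpr ⟨w, hw, rfl⟩
      have e1 := PySem.Dict.getD_of_mem_items d1 hm1 hkeysnd 0
      have e2 := PySem.Dict.getD_of_mem_items d2 hm2 hkeysnd2 0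
      simp only [Function.comp_apply, e1, e2, pvPSum, pvPCard, hfull w hw]
    rw [List.map_congr_left hptw]
    rw [pvSpecFold]
    omega
  | cons p L ih =>
    intro Pref M d1 d2 EL hsplit hch h1 h2 h3 h4 hnd
    have hp : p ∈ pvCells R C := by rw [hsplit]; simp
    obtain ⟨hb1, hb2, hb3, hb4⟩ := (pvMem_cells R C p).mp hp
    obtain ⟨hltP, hltL, hnpPref⟩ := pvSplit_facts R C hsplit
    have hsplit' : pvCells R C = (Pref ++ [p]) ++ L := by rw [hsplit, List.append_assoc]; rfl
    have hELval : ∀ w ∈ EL, pvValid R C g w := fun w hw => (h3 w hw).1.1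
    have hpEL : p ∉ EL := fun hmem => hnpPref ((h3 p hmem).2)
    rw [List.foldl_cons]
    by_cases hvpos : 0 < pvCellGet g p.1 p.2
    case neg =>
      have hnv : ¬ pvValid R C g p := fun hv => hvpos hv.2.2.2.2
      have hstep : pvAccCell g C parF p.1 (d1, d2) p.2 = (d1, d2) := by
        rw [pvAccCell_eq, if_neg hvpos]
      rw [hstep]
      have hskip : ∀ w ∈ EL,
          (pvClassF R C g w).filter (· ∈ Pref ++ [p]) = (pvClassF R C g w).filter (· ∈ Pref) :=
        fun w hw => pvFilter_skip (pvNotMem_classF_invalid R C g (hELval w hw) hnv) Pref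
      have hh1 : d1.items = EL.map (fun w => (pvIdxC C w, pvPSum R C g (Pref ++ [p]) w)) := by
        rw [h1]
        exact List.map_congr_left (fun w hw => by rw [pvPSum, pvPSum, hskip w hw])
      have hh2 : d2.items = EL.map (fun w => (pvIdxC C w, pvPCard R C g (Pref ++ [p]) w)) := by
        rw [h2]
        exact List.map_congr_left (fun w hw => by rw [pvPCard, pvPCard, hskip w hw])
      have hh3 : ∀ w ∈ EL, pvIsFirst R C g w ∧ w ∈ Pref ++ [p] :=
        fun w hw => ⟨(h3 w hw).1, List.mem_append.mpr (Or.inl (h3 w hw).2)⟩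
      have hh4 : ∀ x ∈ Pref ++ [p], pvValid R C g x → pvIsFirst R C g x → x ∈ EL := by
        intro x hx hvx hfx
        rcases List.mem_append.mp hx with hx | hx
        · exact h4 x hx hvx hfx
        · rw [List.mem_singleton] at hx
          rw [hx] at hvx
          exact absurd hvx hnv
      rw [ih (Pref ++ [p]) M d1 d2 EL hsplit'
        (pvMchar_skip R C g hch (fun hc => hnv hc.1)) hh1 hh2 hh3 hh4 hnd]
      rw [pvSpecFold, if_neg (fun hc => hnv ((pvValidB_iff R C g p).mp hc.1))]
    case pos =>
      have hvp : pvValid R C g p := ⟨hb1, hb2, hb3, hb4, hvpos⟩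
      have hfind : pvFind parF parF.length ((p.1 * C + p.2).toNat)
          = pvRootF parF (pvIdxC C p) :=
        pvFind_len_eq_rootF parF inv.mono _
      obtain ⟨w, hwf, hwreach, hwroot⟩ := pvRoot_w R C g parF inv hvp
      have hidxle : pvIdxC C w ≤ pvIdxC C p :=
        hwf.2 p hvp (pvReach_symm R C g hwreach)
      by_cases hfirst : pvIsFirst R C g p
      · -- p opens a new component: fresh dictionary key
        have hwp : w = p := pvFirst_unique R C g hwf hfirst (pvReach_symm R C g hwreach)
        rw [hwp] at hwroot
        have hpM : p ∉ M := (pvNotM_iff_first R C g hch hsplit hvp).mpr hfirst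
        have hfresh : pvIdxC C p ∉ d1.keys ∧ pvIdxC C p ∉ d2.keys := by
          constructor <;>
          · simp only [PySem.Dict.keys, h1, h2, List.map_map]
            intro hmem
            obtain ⟨w', hw', he⟩ := List.mem_map.mp hmem
            have : w' = p := (pvIdxC_eq_iff C w' p (pvCanon R C g (hELval w' hw'))
              (pvCanon R C g hvp)).mp he
            exact hpEL (this ▸ hw')
        have hcont1 : d1.contains (pvIdxC C p) = false := by
          by_contra hc
          have hc' : d1.contains (pvIdxC C p) = true := by
            revert hc
            cases d1.contains (pvIdxC C p) <;> simp
          exact hfresh.1 ((PySem.Dict.contains_iff_mem_keys _ _).mp hc')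
        have hcont2 : d2.contains (pvIdxC C p) = false := by
          by_contra hc
          have hc' : d2.contains (pvIdxC C p) = true := by
            revert hc
            cases d2.contains (pvIdxC C p) <;> simp
          exact hfresh.2 ((PySem.Dict.contains_iff_mem_keys _ _).mp hc')
        have hclassPref : (pvClassF R C g p).filter (· ∈ Pref) = ∅ := by
          ext q
          simp only [Finset.mem_filter, Finset.notMem_empty, iff_false, not_and]
          intro hq hqP
          have hrq := (pvMem_classF_of_valid R C g p hvp q).mp hq
          have hvq := pvReach_valid R C g hvp hrq
          exact hpM ((hch p).mpr ⟨hvp, q, hqP, hvq, pvReach_symm R C g hrq⟩)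
        have hpclass : p ∈ pvClassF R C g p :=
          (pvMem_classF_of_valid R C g p hvp p).mpr .refl
        have hfadd := pvFilter_add (S := pvClassF R C g p) hpclass hnpPref
        have hsum' : pvPSum R C g (Pref ++ [p]) p = pvVal g p := by
          rw [pvPSum, hfadd.1, hclassPref]
          simp
        have hcard' : pvPCard R C g (Pref ++ [p]) p = 1 := by
          rw [pvPCard, hfadd.1, hclassPref]
          simp
        have hPnotin : ∀ w' ∈ EL, p ∉ pvClassF R C g w' := by
          intro w' hw' hmem
          have hr := (pvMem_classF_of_valid R C g w' (hELval w' hw') p).mp hmem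
          exact hpEL ((pvFirst_unique R C g (h3 w' hw').1 hfirst hr) ▸ hw')
        have hold : ∀ w' ∈ EL,
            (pvClassF R C g w').filter (· ∈ Pref ++ [p])
              = (pvClassF R C g w').filter (· ∈ Pref) :=
          fun w' hw' => pvFilter_skip (hPnotin w' hw') Pref
        have hstep : pvAccCell g C parF p.1 (d1, d2) p.2
            = (d1.insert (pvIdxC C p) (pvVal g p), d2.insert (pvIdxC C p) 1) := by
          rw [pvAccCell_eq, if_pos hvpos]
          rw [hfind, pvRoot_first R C g parF inv hfirst]
          rw [PySem.Dict.getD_of_not_contains d1 0 hcont1, PySem.Dict.getD_of_not_contains d2 0 hcont2]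
          rw [zero_add]
          rfl
        rw [hstep]
        have hh1 : (d1.insert (pvIdxC C p) (pvVal g p)).items
            = (EL ++ [p]).map (fun w' => (pvIdxC C w', pvPSum R C g (Pref ++ [p]) w')) := by
          rw [PySem.Dict.items_insert_of_not_contains d1 _ hcont1, h1, List.map_append,
            List.map_singleton, hsum']
          congr 1
          exact List.map_congr_left (fun w' hw' => by rw [pvPSum, pvPSum, hold w' hw'])
        have hh2 : (d2.insert (pvIdxC C p) 1).items
            = (EL ++ [p]).map (fun w' => (pvIdxC C w', pvPCard R C g (Pref ++ [p]) w')) := by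
          rw [PySem.Dict.items_insert_of_not_contains d2 _ hcont2, h2, List.map_append,
            List.map_singleton, hcard']
          congr 1
          exact List.map_congr_left (fun w' hw' => by rw [pvPCard, pvPCard, hold w' hw'])
        have hh3 : ∀ w' ∈ EL ++ [p], pvIsFirst R C g w' ∧ w' ∈ Pref ++ [p] := by
          intro w' hw'
          rcases List.mem_append.mp hw' with hw' | hw'
          · exact ⟨(h3 w' hw').1, List.mem_append.mpr (Or.inl (h3 w' hw').2)⟩
          · rw [List.mem_singleton] at hw'
            rw [hw']
            exact ⟨hfirst, List.mem_append.mpr (Or.inr List.mem_cons_self)⟩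
        have hh4 : ∀ x ∈ Pref ++ [p], pvValid R C g x → pvIsFirst R C g x → x ∈ EL ++ [p] := by
          intro x hx hvx hfx
          rcases List.mem_append.mp hx with hx | hx
          · exact List.mem_append.mpr (Or.inl (h4 x hx hvx hfx))
          · rw [List.mem_singleton] at hx
            rw [hx]
            exact List.mem_append.mpr (Or.inr List.mem_cons_self)
        have hh5 : (EL ++ [p]).Nodup := by
          rw [List.nodup_append]
          refine ⟨hnd, List.nodup_singleton p, ?_⟩
          intro a ha b hb
          have hb' : b = p := by simpa using hb
          subst hb'
          exact fun hab => hpEL (hab ▸ ha)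
        rw [ih (Pref ++ [p]) (M ∪ pvClassF R C g p)
          (d1.insert (pvIdxC C p) (pvVal g p)) (d2.insert (pvIdxC C p) 1) (EL ++ [p])
          hsplit' (pvMchar_fire R C g hch hvp) hh1 hh2 hh3 hh4 hh5]
        rw [pvSpecFold, if_pos ⟨(pvValidB_iff R C g p).mpr hvp, hpM⟩,
          pvSpecFold_shift R C g tS L (M ∪ pvClassF R C g p)
            (0 + (tS - (pvClassF R C g p).sum (pvVal g)) * ((pvClassF R C g p).card : Int)),
          List.map_append, List.map_singleton, List.sum_append, List.sum_singleton]
        ring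
      · -- p joins the component opened at w: existing key is updated
        have hpM : p ∈ M := by
          by_contra hpM
          exact hfirst ((pvNotM_iff_first R C g hch hsplit hvp).mp hpM)
        have hwne : w ≠ p := fun he => hfirst (he ▸ hwf)
        have hidxlt : pvIdxC C w < pvIdxC C p := by
          have hne : pvIdxC C w ≠ pvIdxC C p := fun he =>
            hwne ((pvIdxC_eq_iff C w p (pvCanon R C g hwf.1) (pvCanon R C g hvp)).mp he)
          omega
        have hwPref : w ∈ Pref := by
          have hwcells : w ∈ pvCells R C :=
            (pvMem_cells R C w).mpr ⟨hwf.1.1, hwf.1.2.1, hwf.1.2.2.1, hwf.1.2.2.2.1⟩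
          rw [hsplit] at hwcells
          rcases List.mem_append.mp hwcells with h | h
          · exact h
          · rcases List.mem_cons.mp h with h | h
            · exact absurd h hwne
            · have h1 := hltL w h
              have h2 := (pvIdxC_lt_of_rm C w p (pvCanon R C g hwf.1)
                (pvCanon R C g hvp)).mp hidxlt
              omega
        have hwEL : w ∈ EL := h4 w hwPref hwf.1 hwf
        have hkeysnd : d1.keys.Nodup := by
          simp only [PySem.Dict.keys, h1, List.map_map]
          refine List.Nodup.map_on ?_ hnd
          intro x hx y hy hxy
          exact (pvIdxC_eq_iff C x y (pvCanon R C g (hELval x hx))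
            (pvCanon R C g (hELval y hy))).mp hxy
        have hkeysnd2 : d2.keys.Nodup := by
          simp only [PySem.Dict.keys, h2, List.map_map]
          refine List.Nodup.map_on ?_ hnd
          intro x hx y hy hxy
          exact (pvIdxC_eq_iff C x y (pvCanon R C g (hELval x hx))
            (pvCanon R C g (hELval y hy))).mp hxy
        have hm1 : (pvIdxC C w, pvPSum R C g Pref w) ∈ d1.items := by
          rw [h1]
          exact List.mem_map.mpr ⟨w, hwEL, rfl⟩
        have hm2 : (pvIdxC C w, pvPCard R C g Pref w) ∈ d2.items := by
          rw [h2]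
          exact List.mem_map.mpr ⟨w, hwEL, rfl⟩
        have hcont1 : d1.contains (pvIdxC C w) = true :=
          (PySem.Dict.contains_iff_mem_keys _ _).mpr
            (by simp only [PySem.Dict.keys, h1, List.map_map]
                exact List.mem_map.mpr ⟨w, hwEL, rfl⟩)
        have hcont2 : d2.contains (pvIdxC C w) = true :=
          (PySem.Dict.contains_iff_mem_keys _ _).mpr
            (by simp only [PySem.Dict.keys, h2, List.map_map]
                exact List.mem_map.mpr ⟨w, hwEL, rfl⟩)
        have hgd1 := PySem.Dict.getD_of_mem_items d1 hm1 hkeysnd 0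
        have hgd2 := PySem.Dict.getD_of_mem_items d2 hm2 hkeysnd2 0
        have hpclass : p ∈ pvClassF R C g w :=
          (pvMem_classF_of_valid R C g w hwf.1 p).mpr (pvReach_symm R C g hwreach)
        have hfadd := pvFilter_add (S := pvClassF R C g w) hpclass hnpPref
        have hsum' : pvPSum R C g (Pref ++ [p]) w = pvPSum R C g Pref w + pvVal g p := by
          rw [pvPSum, hfadd.1, Finset.sum_insert hfadd.2, pvPSum]
          ring
        have hcard' : pvPCard R C g (Pref ++ [p]) w = pvPCard R C g Pref w + 1 := by
          rw [pvPCard, hfadd.1, Finset.card_insert_of_notMem hfadd.2, pvPCard]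
          push_cast
          ring
        have hothers : ∀ w' ∈ EL, w' ≠ w → p ∉ pvClassF R C g w' := by
          intro w' hw' hne hmem
          have hr := (pvMem_classF_of_valid R C g w' (hELval w' hw') p).mp hmem
          exact hne (pvFirst_unique R C g (h3 w' hw').1 hwf
            (pvReach_trans R C g hr hwreach))
        have hstep : pvAccCell g C parF p.1 (d1, d2) p.2
            = (d1.insert (pvIdxC C w) (pvPSum R C g Pref w + pvVal g p),
               d2.insert (pvIdxC C w) (pvPCard R C g Pref w + 1)) := by
          rw [pvAccCell_eq, if_pos hvpos, hfind, hwroot, hgd1, hgd2]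
          rfl
        have hitems1 : (d1.insert (pvIdxC C w) (pvPSum R C g Pref w + pvVal g p)).items
            = EL.map (fun w' => (pvIdxC C w', pvPSum R C g (Pref ++ [p]) w')) := by
          rw [PySem.Dict.items_insert_of_contains d1 _ hcont1, h1, List.map_map]
          refine List.map_congr_left ?_
          intro w' hw'
          simp only [Function.comp_apply]
          by_cases hne : w' = w
          · rw [hne]
            rw [if_pos (by simp)]
            rw [hsum']
          · have hineq : pvIdxC C w' ≠ pvIdxC C w := fun he =>
              hne ((pvIdxC_eq_iff C w' w (pvCanon R C g (hELval w' hw'))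
                (pvCanon R C g hwf.1)).mp he)
            rw [if_neg (by simp [hineq])]
            rw [pvPSum, pvPSum, pvFilter_skip (hothers w' hw' hne) Pref]
        have hitems2 : (d2.insert (pvIdxC C w) (pvPCard R C g Pref w + 1)).items
            = EL.map (fun w' => (pvIdxC C w', pvPCard R C g (Pref ++ [p]) w')) := by
          rw [PySem.Dict.items_insert_of_contains d2 _ hcont2, h2, List.map_map]
          refine List.map_congr_left ?_
          intro w' hw'
          simp only [Function.comp_apply]
          by_cases hne : w' = w
          · rw [hne]
            rw [if_pos (by simp)]
            rw [hcard']
          · have hineq : pvIdxC C w' ≠ pvIdxC C w := fun he =>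
              hne ((pvIdxC_eq_iff C w' w (pvCanon R C g (hELval w' hw'))
                (pvCanon R C g hwf.1)).mp he)
            rw [if_neg (by simp [hineq])]
            rw [pvPCard, pvPCard, pvFilter_skip (hothers w' hw' hne) Pref]
        have pvB_hh3 : ∀ w' ∈ EL, pvIsFirst R C g w' ∧ w' ∈ Pref ++ [p] :=
          fun w' hw' => ⟨(h3 w' hw').1, List.mem_append.mpr (Or.inl (h3 w' hw').2)⟩
        have pvB_hh4 : ∀ x ∈ Pref ++ [p], pvValid R C g x → pvIsFirst R C g x → x ∈ EL := by
          intro x hx hvx hfx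
          rcases List.mem_append.mp hx with hx | hx
          · exact h4 x hx hvx hfx
          · rw [List.mem_singleton] at hx
            rw [hx] at hfx
            exact absurd hfx hfirst
        rw [hstep]
        rw [ih (Pref ++ [p]) M _ _ EL hsplit'
          (pvMchar_skip R C g hch (fun hc => hc.2 hpM))
          hitems1 hitems2
          pvB_hh3 pvB_hh4 hnd]
        rw [pvSpecFold, if_neg (fun hc => hc.2 hpM)]
-- ---- glue: both ports equal the canonical specification fold ----
theorem pvMchar_empty (R C : Int) (g : List (List Int)) : pvMchar R C g ∅ [] := by
  intro q
  simp [pvMchar]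

theorem pvA_gen (R C tS : Int) (g : List (List Int)) :
    ((PySem.List.pyRange 0 R 1).foldl (pvAOuter R C tS) (g, 0)).2
      = pvSpecFold R C g tS (pvCells R C) ∅ 0 := by
  have hA : (PySem.List.pyRange 0 R 1).foldl (pvAOuter R C tS) (g, 0)
      = (pvCells R C).foldl (fun st (p : Int × Int) => pvAInner R C tS p.1 st p.2) (g, 0) :=
    pvFoldl_nested (PySem.List.pyRange 0 R 1) (PySem.List.pyRange 0 C 1)
      (fun st (p : Int × Int) => pvAInner R C tS p.1 st p.2) (g, 0)
  rw [hA]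
  have h := pvAfold R C g tS (pvCells R C) [] ∅ 0 (by rw [List.nil_append])
    (pvMchar_empty R C g)
  rw [pvMarkS_empty] at h
  exact h

theorem pvB_gen (R C tS : Int) (g : List (List Int)) (N : Nat)
    (hN : N = R.toNat * C.toNat) :
    pvKeySum tS ((PySem.List.pyRange 0 R 1).foldl
      (fun st r => (PySem.List.pyRange 0 C 1).foldl
        (pvAccCell g C ((PySem.List.pyRange 0 R 1).foldl
          (fun p r => (PySem.List.pyRange 0 C 1).foldl (pvUnionCell g R C r) p)
          (List.range N)) r) st)
      (PySem.Dict.empty, PySem.Dict.empty))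
      = pvSpecFold R C g tS (pvCells R C) ∅ 0 := by
  subst hN
  have hparF : (PySem.List.pyRange 0 R 1).foldl
        (fun p r => (PySem.List.pyRange 0 C 1).foldl (pvUnionCell g R C r) p)
        (List.range (R.toNat * C.toNat))
      = (pvCells R C).foldl
          (fun par (p : Int × Int) => pvUnionCell g R C p.1 par p.2)
          (List.range (R.toNat * C.toNat)) :=
    pvFoldl_nested (PySem.List.pyRange 0 R 1) (PySem.List.pyRange 0 C 1)
      (fun par (p : Int × Int) => pvUnionCell g R C p.1 par p.2)
      (List.range (R.toNat * C.toNat))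
  have hinv0 : pvInvE R C g (pvEAdj R C g []) (List.range (R.toNat * C.toNat)) :=
    pvInvE_congr (fun x y => (pvEAdj_nil R C g x y).symm) (pvInvE_init R C g)
  have hinvF := pvUnion_fold R C g (pvCells R C) [] (List.range (R.toNat * C.toNat))
    (by rw [List.nil_append]) hinv0
  have hinv : pvInvE R C g (pvAdj R C g)
      ((pvCells R C).foldl (fun par (p : Int × Int) => pvUnionCell g R C p.1 par p.2)
        (List.range (R.toNat * C.toNat))) :=
    pvInvE_congr (fun x y => pvEAdj_cells R C g x y) hinvF
  have hAcc : (PySem.List.pyRange 0 R 1).foldl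
        (fun st r => (PySem.List.pyRange 0 C 1).foldl
          (pvAccCell g C ((PySem.List.pyRange 0 R 1).foldl
            (fun p r => (PySem.List.pyRange 0 C 1).foldl (pvUnionCell g R C r) p)
            (List.range (R.toNat * C.toNat))) r) st)
        (PySem.Dict.empty, PySem.Dict.empty)
      = (pvCells R C).foldl
          (fun st (p : Int × Int) => pvAccCell g C
            ((PySem.List.pyRange 0 R 1).foldl
              (fun p r => (PySem.List.pyRange 0 C 1).foldl (pvUnionCell g R C r) p)
              (List.range (R.toNat * C.toNat))) p.1 st p.2)
          (PySem.Dict.empty, PySem.Dict.empty) :=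
    pvFoldl_nested (PySem.List.pyRange 0 R 1) (PySem.List.pyRange 0 C 1)
      (fun st (p : Int × Int) => pvAccCell g C
        ((PySem.List.pyRange 0 R 1).foldl
          (fun p r => (PySem.List.pyRange 0 C 1).foldl (pvUnionCell g R C r) p)
          (List.range (R.toNat * C.toNat))) p.1 st p.2)
      (PySem.Dict.empty, PySem.Dict.empty)
  rw [hAcc, hparF]
  have hdict := pvBdict R C g tS _ hinv (pvCells R C) [] ∅
    PySem.Dict.empty PySem.Dict.empty [] (by rw [List.nil_append])
    (pvMchar_empty R C g) rfl rfl (by simp) (by simp) List.nodup_nil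
  rw [hdict]
  simp

theorem pvAB_eq (grid : List (List Int)) : sumRemoteness grid = sumRemoteness_alt grid := by
  show ((PySem.List.pyRange 0 (grid.length : Int) 1).foldl
      (pvAOuter (grid.length : Int) ((grid.headD []).length : Int)
        ((grid.flatMap (fun row => row.filter (fun v => decide (v ≠ -1)))).sum))
      (grid, 0)).2 = sumRemoteness_alt grid
  rw [pvA_gen (grid.length : Int) ((grid.headD []).length : Int)
    ((grid.flatMap (fun row => row.filter (fun v => decide (v ≠ -1)))).sum) grid]
  exact (pvB_gen (grid.length : Int) ((grid.headD []).length : Int)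
    ((grid.flatMap (fun row => row.filter (fun v => decide (v ≠ -1)))).sum) grid
    (grid.length * (grid.headD []).length) (by simp)).symm

-- ===== VERDICT (by name: the statement is the Claim_ definition above) =====
theorem sumRemoteness_spec : Claim_equal_sumRemoteness := by
  intro grid _ _
  unfold Spec_sumRemoteness
  exact pvAB_eq grid
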